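-- pv_equiv track=rewrite | github.com/antonegas/kattis | exercises07/hiding_places.py | get_hiding_places
-- ===== SOURCE A (Python) =====
-- from collections import deque
--
-- def get_hiding_places(chess_position: str) -> list[str]:
--     column_letters = "abcdefgh"
--     column = column_letters.index(chess_position[0])
--     row = int(chess_position[1]) - 1
--
--     board = [[-1] * 8 for _ in range(8)]
--     board[row][column] = 0
--
--     queue = deque([(column, row, 0)])
--
--     while len(queue) > 0:
--         x, y, turn = queue.popleft()
--
--         for dx, dy in [(-1, -2), (1, -2), (-1, 2), (1, 2), (-2, -1), (-2, 1), (2, -1), (2, 1)]: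
--             if x + dx < 0 or x + dx > 7 or y + dy < 0 or y + dy > 7:
--                 continue
--
--             if board[y + dy][x + dx] >= 0:
--                 continue
--
--             board[y + dy][x + dx] = turn + 1
--
--             queue.append((x + dx, y + dy, turn + 1))
--
--     result = list()
--     most_moves = 0
--
--     for y in reversed(range(8)):
--         for x in range(8):
--             chess_notation = f"{column_letters[x]}{y + 1}"
--             if board[y][x] > most_moves:
--                 most_moves = board[y][x]
--                 result = [chess_notation]
--             elif board[y][x] == most_moves:
--                 result.append(chess_notation)
--
--     return most_moves, result
-- ===== SOURCE B (Python) =====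
-- def get_hiding_places(chess_position: str):
--     column_letters = "abcdefgh"
--     col = column_letters.index(chess_position[0])
--     row = int(chess_position[1]) - 1
--
--     # Queue-free wavefront dynamic programming: no BFS queue/frontier at all.
--     # dist is a flat 64-cell array; round d sweeps the whole board and marks
--     # every still-unvisited cell that has a knight neighbour at distance d.
--     moves = ((-1, -2), (1, -2), (-1, 2), (1, 2), (-2, -1), (-2, 1), (2, -1), (2, 1))
--     dist = [-1] * 64
--     dist[row * 8 + col] = 0
--     d = 0
--     marked = True
--     while marked:
--         marked = False
--         for i in range(64):
--             if dist[i] < 0: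
--                 x, y = i % 8, i // 8
--                 if any(0 <= x + dx <= 7 and 0 <= y + dy <= 7
--                        and dist[(y + dy) * 8 + (x + dx)] == d
--                        for dx, dy in moves):
--                     dist[i] = d + 1
--                     marked = True
--         d += 1
--
--     most_moves = 0
--     result = []
--     for y in range(7, -1, -1):
--         for x in range(8):
--             v = dist[y * 8 + x]
--             notation = f"{column_letters[x]}{y + 1}"
--             if v > most_moves:
--                 most_moves = v
--                 result = [notation]
--             elif v == most_moves:
--                 result.append(notation)
--     return most_moves, result
-- ===== Notes on version B (the rewrite author's own statement) =====
-- stated objective: alternative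
-- what changed: Replaces A's deque-based knight BFS over a nested 8x8 list board with a queue-free wavefront dynamic program over a flat 64-cell array: round d sweeps the whole board and marks every unvisited cell that has a knight neighbour at distance d, repeating until a sweep marks nothing; no queue or frontier structure is kept.
-- intended difference: On squares whose rank digit is zero (not a real chessboard square) A marks square (col,8) via Python's negative-index wraparound yet seeds its BFS at the off-board cell (col,-1), returning inconsistent distances; B returns the knight distances from the square (col,8) that both implementations mark as distance 0, the self-consistent value. — e.g. on get_hiding_places("a0"): A returns (6, ["g8", "h7"]), B returns (6, ["h1"])
import Mathlib
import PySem

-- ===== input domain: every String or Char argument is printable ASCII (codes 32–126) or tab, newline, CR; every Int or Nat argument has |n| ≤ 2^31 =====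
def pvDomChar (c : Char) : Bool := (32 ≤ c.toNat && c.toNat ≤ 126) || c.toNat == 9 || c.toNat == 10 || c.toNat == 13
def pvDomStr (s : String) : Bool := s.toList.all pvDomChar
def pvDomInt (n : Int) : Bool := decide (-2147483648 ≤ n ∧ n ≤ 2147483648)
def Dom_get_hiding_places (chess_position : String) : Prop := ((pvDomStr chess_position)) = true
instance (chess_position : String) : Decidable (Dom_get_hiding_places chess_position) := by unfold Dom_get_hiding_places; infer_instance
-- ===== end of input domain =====

set_option maxRecDepth 40000

-- B replaces A's deque-based knight BFS over a nested 8x8 board by a queue-free wavefront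
-- dynamic programming over a flat 64-cell array (round d marks every unvisited cell with a
-- knight neighbour at distance d); return value only, equality proved outside D_ (rank digit '0').

-- ===== PORT A =====
def pvColsA : List Char := "abcdefgh".toList

def pvMovesA : List (Int × Int) := [(-1,-2),(1,-2),(-1,2),(1,2),(-2,-1),(-2,1),(2,-1),(2,1)]

-- board[y][x] read / write with Python (possibly negative) indices
def pvBGetA (b : List (List Int)) (y x : Int) : Int :=
  PySem.List.pyGetD (PySem.List.pyGetD b y []) x (-1)

def pvBSetA (b : List (List Int)) (y x : Int) (v : Int) : List (List Int) :=
  PySem.List.pySetD b y (PySem.List.pySetD (PySem.List.pyGetD b y []) x v)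

-- the while loop over the deque: pop one cell, relax the 8 knight moves in order; fuel bounds the pops
-- (the queue holds at most 65 cells in total, so fuel 100 is never exhausted)
def pvBfsA : Nat → List (Int × Int × Int) → List (List Int) → List (List Int)
  | 0, _, b => b
  | _ + 1, [], b => b
  | fuel + 1, (x, y, turn) :: qs, b =>
      match pvMovesA.foldl (fun (st : List (Int × Int × Int) × List (List Int)) m =>
        if x + m.1 < 0 ∨ x + m.1 > 7 ∨ y + m.2 < 0 ∨ y + m.2 > 7 then st
        else if pvBGetA st.2 (y + m.2) (x + m.1) ≥ 0 then st
        else (st.1 ++ [(x + m.1, y + m.2, turn + 1)],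
              pvBSetA st.2 (y + m.2) (x + m.1) (turn + 1))) (qs, b) with
      | (q, b') => pvBfsA fuel q b'

-- the final double loop: reversed rows, ascending columns, keeping (most_moves, result)
def pvScanA (board : List (List Int)) : Int × List String :=
  ((PySem.List.pyRange 0 8 1).reverse).foldl (fun acc y =>
    (PySem.List.pyRange 0 8 1).foldl (fun (acc : Int × List String) x =>
      let nota := String.ofList (PySem.List.pyGetD pvColsA x ' ' :: PySem.Int.toChars (y + 1))
      if pvBGetA board y x > acc.1 then (pvBGetA board y x, [nota])
      else if pvBGetA board y x = acc.1 then (acc.1, acc.2 ++ [nota])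
      else acc) acc) ((0 : Int), ([] : List String))

def pvRunA (column row : Int) : Int × List String :=
  pvScanA (pvBfsA 100 [(column, row, 0)]
    (pvBSetA (List.replicate 8 (List.replicate 8 (-1 : Int))) row column 0))

def pvGoA (c0 c1 : Char) : Int × List String :=
  match PySem.List.index? pvColsA c0, PySem.Int.ofChars? [c1] with
  | some colN, some n => pvRunA colN (n - 1)
  | _, _ => (0, [])

def get_hiding_places (chess_position : String) : Int × List String :=
  match PySem.Str.pyGet? chess_position 0, PySem.Str.pyGet? chess_position 1 with
  | some c0, some c1 => pvGoA c0 c1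
  | _, _ => (0, [])

-- ===== PORT B =====
def pvColsB : List Char := ['a','b','c','d','e','f','g','h']

def pvMovesB : List (Int × Int) := [(-1,-2),(1,-2),(-1,2),(1,2),(-2,-1),(-2,1),(2,-1),(2,1)]

def pvDGetB (dist : List Int) (i : Int) : Int := PySem.List.pyGetD dist i (-1)

-- one full-board sweep at wavefront value d: mark every unvisited cell that has a knight
-- neighbour at distance d (the flag is Source B's `marked`)
def pvPullSweep (dist : List Int) (d : Int) : List Int × Bool :=
  (PySem.List.pyRange 0 64 1).foldl (fun (st : List Int × Bool) i =>
    if pvDGetB st.1 i < 0 then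
      let x := PySem.Int.mod i 8
      let y := PySem.Int.floordiv i 8
      if pvMovesB.any (fun m => decide (0 ≤ x + m.1 ∧ x + m.1 ≤ 7 ∧ 0 ≤ y + m.2 ∧ y + m.2 ≤ 7 ∧
          pvDGetB st.1 ((y + m.2) * 8 + (x + m.1)) = d)) then
        (PySem.List.pySetD st.1 i (d + 1), true)
      else st
    else st) (dist, false)

-- the while-marked loop; fuel bounds the rounds (at most 65 rounds can mark anything)
def pvPullLoop : Nat → List Int → Int → List Int
  | 0, dist, _ => dist
  | f + 1, dist, d =>
      let s := pvPullSweep dist d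
      if s.2 then pvPullLoop f s.1 (d + 1) else s.1

-- the final double loop over the flat array: countdown rows, ascending columns
def pvScanB (dist : List Int) : Int × List String :=
  (PySem.List.pyRange 7 (-1) (-1)).foldl (fun acc y =>
    (PySem.List.pyRange 0 8 1).foldl (fun (acc : Int × List String) x =>
      let v := pvDGetB dist (y * 8 + x)
      let nota := String.ofList (PySem.List.pyGetD pvColsB x ' ' :: PySem.Int.toChars (y + 1))
      if v > acc.1 then (v, [nota])
      else if v = acc.1 then (acc.1, acc.2 ++ [nota])
      else acc) acc) ((0 : Int), ([] : List String))

def pvRunP (col row : Int) : Int × List String :=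
  pvScanB (pvPullLoop 100 (PySem.List.pySetD (List.replicate 64 (-1 : Int)) (row * 8 + col) 0) 0)

def pvGoP (c0 c1 : Char) : Int × List String :=
  match PySem.List.index? pvColsB c0, PySem.Int.ofChars? [c1] with
  | some colN, some n => pvRunP colN (n - 1)
  | _, _ => (0, [])

def get_hiding_places_alt (chess_position : String) : Int × List String :=
  match PySem.Str.pyGet? chess_position 0, PySem.Str.pyGet? chess_position 1 with
  | some c0, some c1 => pvGoP c0 c1
  | _, _ => (0, [])

-- ===== PRECONDITION & SPEC =====
-- Pre_: the first char is a column letter a-h and the second a digit 0-8; on every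
-- other input A raises (IndexError on short strings or digit 9, ValueError otherwise).
def Pre_get_hiding_places (chess_position : String) : Prop :=
  (match chess_position.toList with
   | c0 :: c1 :: _ => pvColsA.contains c0 && (['0','1','2','3','4','5','6','7','8'] : List Char).contains c1
   | _ => false) = true
instance (chess_position : String) : Decidable (Pre_get_hiding_places chess_position) := by
  unfold Pre_get_hiding_places; infer_instance

def pvWitness_get_hiding_places : String := "d4"

-- On squares whose rank digit is zero (not a real chessboard square) A returns an inconsistent
-- answer: Python's negative-index wraparound marks square (col,8) as the start, yet the BFS is
-- seeded at the off-board cell (col,-1); B returns the knight distances measured from the square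
-- (col,8) that both implementations mark as distance 0, which is the self-consistent value.
def D_get_hiding_places (chess_position : String) : Prop :=
  chess_position.toList[1]? = some '0'
instance (chess_position : String) : Decidable (D_get_hiding_places chess_position) := by
  unfold D_get_hiding_places; infer_instance

def Spec_get_hiding_places (chess_position : String) (out : Int × List String) : Prop :=
  ¬ D_get_hiding_places chess_position → out = get_hiding_places_alt chess_position
instance (chess_position : String) (out : Int × List String) : Decidable (Spec_get_hiding_places chess_position out) := by unfold Spec_get_hiding_places; infer_instance

def pvDiffWitness_get_hiding_places : String := "a0"

def pvDiffWitnessOut_get_hiding_places : (Int × List String) × (Int × List String) :=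
  ((6, ["g8", "h7"]), (6, ["h1"]))

-- ===== CLAIM (what is proved, stated in full; the proofs are below) =====
def Claim_unchanged_get_hiding_places : Prop := ∀ (chess_position : String), Dom_get_hiding_places chess_position → Pre_get_hiding_places chess_position → Spec_get_hiding_places chess_position (get_hiding_places chess_position)

def Claim_changed_get_hiding_places : Prop := Dom_get_hiding_places (pvDiffWitness_get_hiding_places) ∧ Pre_get_hiding_places (pvDiffWitness_get_hiding_places) ∧ D_get_hiding_places (pvDiffWitness_get_hiding_places) ∧ get_hiding_places (pvDiffWitness_get_hiding_places) = pvDiffWitnessOut_get_hiding_places.1 ∧ get_hiding_places_alt (pvDiffWitness_get_hiding_places) = pvDiffWitnessOut_get_hiding_places.2 ∧ pvDiffWitnessOut_get_hiding_places.1 ≠ pvDiffWitnessOut_get_hiding_places.2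

def Claim_exact_get_hiding_places : Prop := ∀ (chess_position : String), Dom_get_hiding_places chess_position → Pre_get_hiding_places chess_position → D_get_hiding_places chess_position → get_hiding_places chess_position ≠ get_hiding_places_alt chess_position

-- ===== LEMMAS AND PROOFS =====

-- ---------- part 1: A's deque BFS equals a level-synchronous frontier BFS on the flat board ----------

-- reference frontier BFS (proof-side only): one whole level per fuel step
def pvFrBfs : Nat → List (Int × Int) → List Int → Int → List Int
  | 0, _, dist, _ => dist
  | _ + 1, [], dist, _ => dist
  | fuel + 1, frontier, dist, d =>
      match frontier.foldl (fun st p =>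
        pvMovesB.foldl (fun (st : List (Int × Int) × List Int) m =>
          let nx := p.1 + m.1
          let ny := p.2 + m.2
          if 0 ≤ nx ∧ nx ≤ 7 ∧ 0 ≤ ny ∧ ny ≤ 7 ∧ pvDGetB st.2 (ny * 8 + nx) < 0 then
            (st.1 ++ [(nx, ny)], PySem.List.pySetD st.2 (ny * 8 + nx) (d + 1))
          else st) st) (([] : List (Int × Int)), dist) with
      | (nxt, dist') => pvFrBfs fuel nxt dist' (d + 1)

def pvFrRun (col row : Int) : Int × List String :=
  pvScanB (pvFrBfs 100 [(col, row)]
    (PySem.List.pySetD (List.replicate 64 (-1 : Int)) (row * 8 + col) 0) 0)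

def pvFrGo (c0 c1 : Char) : Int × List String :=
  match PySem.List.index? pvColsB c0, PySem.Int.ofChars? [c1] with
  | some colN, some n => pvFrRun colN (n - 1)
  | _, _ => (0, [])

-- pair-to-triple: tag a frontier cell with its BFS level (A stores the level in the queue)
def pvTT (lvl : Int) (p : Int × Int) : Int × Int × Int := (p.1, p.2, lvl)

-- number of still-unvisited (negative) cells of the flat board
def pvNeg (d : List Int) : Nat := d.countP (fun v => decide (v < 0))

-- correspondence between A's nested 8x8 board and the flat 64-cell board
def pvRel (b : List (List Int)) (d : List Int) : Prop :=
  b.length = 8 ∧ (∀ r ∈ b, r.length = 8) ∧ d.length = 64 ∧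
  ∀ y x : Int, 0 ≤ y → y < 8 → 0 ≤ x → x < 8 → pvBGetA b y x = pvDGetB d (y * 8 + x)

-- the move-relaxation step of A's BFS loop, as a named function (definitionally the
-- lambda inside pvBfsA)
def pvStepA (x y turn : Int) (st : List (Int × Int × Int) × List (List Int))
    (m : Int × Int) : List (Int × Int × Int) × List (List Int) :=
  if x + m.1 < 0 ∨ x + m.1 > 7 ∨ y + m.2 < 0 ∨ y + m.2 > 7 then st
  else if pvBGetA st.2 (y + m.2) (x + m.1) ≥ 0 then st
  else (st.1 ++ [(x + m.1, y + m.2, turn + 1)],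
        pvBSetA st.2 (y + m.2) (x + m.1) (turn + 1))

-- the move-relaxation step of the frontier BFS (definitionally the inner lambda of pvFrBfs)
def pvStepB (p : Int × Int) (d0 : Int) (st : List (Int × Int) × List Int)
    (m : Int × Int) : List (Int × Int) × List Int :=
  let nx := p.1 + m.1
  let ny := p.2 + m.2
  if 0 ≤ nx ∧ nx ≤ 7 ∧ 0 ≤ ny ∧ ny ≤ 7 ∧ pvDGetB st.2 (ny * 8 + nx) < 0 then
    (st.1 ++ [(nx, ny)], PySem.List.pySetD st.2 (ny * 8 + nx) (d0 + 1))
  else st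

-- one unfolding of A's loop on a non-empty queue
lemma pvBfsA_cons (f : Nat) (x y turn : Int) (qs : List (Int × Int × Int))
    (b : List (List Int)) :
    pvBfsA (f + 1) ((x, y, turn) :: qs) b =
      pvBfsA f (pvMovesA.foldl (pvStepA x y turn) (qs, b)).1
        (pvMovesA.foldl (pvStepA x y turn) (qs, b)).2 := by
  cases h : pvMovesA.foldl (pvStepA x y turn) (qs, b) with
  | mk q b2 =>
    show (match pvMovesA.foldl (pvStepA x y turn) (qs, b) with
          | (q, b') => pvBfsA f q b') = _
    rw [h]

-- one unfolding of the frontier loop on a non-empty frontier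
lemma pvFrBfs_cons (f : Nat) (p : Int × Int) (fr : List (Int × Int))
    (dist : List Int) (d0 : Int) :
    pvFrBfs (f + 1) (p :: fr) dist d0 =
      pvFrBfs f ((p :: fr).foldl (fun st q => pvMovesB.foldl (pvStepB q d0) st) ([], dist)).1
        ((p :: fr).foldl (fun st q => pvMovesB.foldl (pvStepB q d0) st) ([], dist)).2
        (d0 + 1) := by
  cases h : (p :: fr).foldl (fun st q => pvMovesB.foldl (pvStepB q d0) st) ([], dist) with
  | mk nxt d2 =>
    show (match (p :: fr).foldl (fun st q => pvMovesB.foldl (pvStepB q d0) st) ([], dist) with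
          | (nxt, d') => pvFrBfs f nxt d' (d0 + 1)) = _
    rw [h]

-- running A / the frontier BFS on an empty worklist returns the board unchanged, whatever the fuel
lemma pvBfsA_nil (f : Nat) (b : List (List Int)) : pvBfsA f [] b = b := by
  cases f <;> rfl

lemma pvFrBfs_nil (f : Nat) (dist : List Int) (d0 : Int) : pvFrBfs f [] dist d0 = dist := by
  cases f <;> rfl

-- Python list write at a negative in-range index wraps to the end
lemma pvSetNeg {α : Type} (xs : List α) (i : Int) (v : α)
    (h1 : -(xs.length : Int) ≤ i) (h2 : i < 0) :
    PySem.List.pySetD xs i v = xs.set ((xs.length : Int) + i).toNat v := by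
  simp only [PySem.List.pySetD, PySem.List.pySet?, PySem.List.pyIdx?]
  rw [if_neg (by omega), if_pos h1]
  simp only [Option.map_some, Option.getD_some]
  congr 1
  omega

lemma pvGetRepl {α : Type} (n : Nat) (a d : α) (i : Int)
    (h1 : -(n : Int) ≤ i) (h2 : i < (n : Int)) :
    PySem.List.pyGetD (List.replicate n a) i d = a := by
  simp only [PySem.List.pyGetD, PySem.List.pyGet?, PySem.List.pyIdx?, List.length_replicate]
  by_cases h0 : 0 ≤ i
  · rw [if_pos h0, if_pos h2]
    simp only [Option.bind_some, List.getElem?_replicate]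
    rw [if_pos (by omega)]
    rfl
  · rw [if_neg h0, if_pos h1]
    simp only [Option.bind_some, List.getElem?_replicate]
    rw [if_pos (by omega)]
    rfl

lemma pvDSet_get (d : List Int) (i j v : Int) (hlen : d.length = 64)
    (hi1 : 0 ≤ i) (hi2 : i < 64) (hj1 : 0 ≤ j) (hj2 : j < 64) :
    pvDGetB (PySem.List.pySetD d i v) j = if j = i then v else pvDGetB d j := by
  unfold pvDGetB
  rw [show i = ((i.toNat : Nat) : Int) from by omega,
      show j = ((j.toNat : Nat) : Int) from by omega,
      PySem.List.pyGetD_pySetD_natCast d i.toNat j.toNat v (-1) (by omega)]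
  by_cases h : j.toNat = i.toNat
  · rw [if_pos h, if_pos (by exact_mod_cast h)]
  · rw [if_neg h, if_neg (by intro hc; exact h (by exact_mod_cast hc))]

-- reading any in-range nonneg natural index is plain getElem
lemma pvRowAt {α : Type} (b : List α) (n : Nat) (dflt : α) (hn : n < b.length) :
    PySem.List.pyGetD b ((n : Nat) : Int) dflt = b[n] := by
  unfold PySem.List.pyGetD
  rw [PySem.List.pyGet?_natCast]
  simp [List.getElem?_eq_getElem hn]

lemma pvBSet_get (b : List (List Int)) (y x y' x' v : Int)
    (hb : b.length = 8) (hr : ∀ r ∈ b, r.length = 8)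
    (hy1 : 0 ≤ y) (hy2 : y < 8) (hx1 : 0 ≤ x) (hx2 : x < 8)
    (hy1' : 0 ≤ y') (hy2' : y' < 8) (hx1' : 0 ≤ x') (hx2' : x' < 8) :
    pvBGetA (pvBSetA b y x v) y' x' =
      if y' = y ∧ x' = x then v else pvBGetA b y' x' := by
  have hylt : y.toNat < b.length := by omega
  have hylt' : y'.toNat < b.length := by omega
  have hrowlen : (b[y.toNat]'hylt).length = 8 := hr _ (List.getElem_mem _)
  unfold pvBGetA pvBSetA
  rw [show y = ((y.toNat : Nat) : Int) from by omega,
      show y' = ((y'.toNat : Nat) : Int) from by omega,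
      show x = ((x.toNat : Nat) : Int) from by omega,
      show x' = ((x'.toNat : Nat) : Int) from by omega,
      pvRowAt b y.toNat [] hylt,
      PySem.List.pyGetD_pySetD_natCast b y.toNat y'.toNat _ [] (by omega)]
  by_cases hyy : y'.toNat = y.toNat
  · rw [if_pos hyy,
        PySem.List.pyGetD_pySetD_natCast _ x.toNat x'.toNat v (-1) (by omega)]
    by_cases hxx : x'.toNat = x.toNat
    · rw [if_pos hxx, if_pos (by constructor <;> omega)]
    · rw [if_neg hxx, if_neg (by rintro ⟨h1, h2⟩; exact hxx (by omega)), hyy,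
          pvRowAt b y.toNat [] hylt]
  · rw [if_neg hyy, if_neg (by rintro ⟨h1, h2⟩; exact hyy (by omega))]

-- a nested write at an in-range row keeps the board 8 x 8
lemma pvBSet_shape (b : List (List Int)) (y x v : Int)
    (hb : b.length = 8) (hr : ∀ r ∈ b, r.length = 8)
    (hy1 : 0 ≤ y) (hy2 : y < 8) :
    (pvBSetA b y x v).length = 8 ∧ ∀ r ∈ pvBSetA b y x v, r.length = 8 := by
  unfold pvBSetA
  rw [show y = ((y.toNat : Nat) : Int) from by omega, PySem.List.pySetD_natCast]
  refine ⟨by simp [hb], ?_⟩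
  intro r hrmem
  rcases List.mem_or_eq_of_mem_set hrmem with hmem | heq
  · exact hr r hmem
  · rw [heq, PySem.List.length_pySetD,
        pvRowAt b y.toNat [] (by omega)]
    exact hr _ (List.getElem_mem _)

-- a write that turns a negative cell non-negative decreases the negative count by one
lemma pvNeg_set (d : List Int) (i v : Int) (hlen : d.length = 64)
    (hi1 : 0 ≤ i) (hi2 : i < 64) (hold : pvDGetB d i < 0) (hv : 0 ≤ v) :
    pvNeg (PySem.List.pySetD d i v) + 1 = pvNeg d := by
  have hlt : i.toNat < d.length := by omega
  have hget : pvDGetB d i = d[i.toNat] := by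
    unfold pvDGetB
    conv_lhs => rw [show i = ((i.toNat : Nat) : Int) from by omega]
    exact pvRowAt d i.toNat (-1) hlt
  rw [hget] at hold
  have hpos : 0 < pvNeg d := by
    unfold pvNeg
    rw [List.countP_pos_iff]
    exact ⟨d[i.toNat], List.getElem_mem _, by simp [hold]⟩
  unfold pvNeg
  rw [show i = ((i.toNat : Nat) : Int) from by omega, PySem.List.pySetD_natCast,
      List.countP_set hlt]
  rw [if_pos (by simp [hold]), if_neg (by simp; omega)]
  unfold pvNeg at hpos
  omega

-- pvRel is preserved by the paired write of one discovered cell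
lemma pvRel_write (b : List (List Int)) (d : List Int) (y x v : Int)
    (hrel : pvRel b d) (hy1 : 0 ≤ y) (hy2 : y < 8) (hx1 : 0 ≤ x) (hx2 : x < 8) :
    pvRel (pvBSetA b y x v) (PySem.List.pySetD d (y * 8 + x) v) := by
  obtain ⟨hb, hr, hd, hread⟩ := hrel
  obtain ⟨hb', hr'⟩ := pvBSet_shape b y x v hb hr hy1 hy2
  refine ⟨hb', hr', by rw [PySem.List.length_pySetD]; exact hd, ?_⟩
  intro y' x' hy1' hy2' hx1' hx2'
  rw [pvBSet_get b y x y' x' v hb hr hy1 hy2 hx1 hx2 hy1' hy2' hx1' hx2',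
      pvDSet_get d (y * 8 + x) (y' * 8 + x') v hd (by omega) (by omega) (by omega) (by omega)]
  by_cases h : y' = y ∧ x' = x
  · rw [if_pos h, if_pos (by omega)]
  · rw [if_neg h, if_neg (by intro hc; exact h (by constructor <;> omega))]
    exact hread y' x' hy1' hy2' hx1' hx2'

-- the frontier move fold only appends to its accumulator, and the board part ignores it
lemma pvShiftB (moves : List (Int × Int)) (p : Int × Int) (d0 : Int)
    (acc : List (Int × Int)) (d : List Int) :
    moves.foldl (pvStepB p d0) (acc, d) =
      (acc ++ (moves.foldl (pvStepB p d0) ([], d)).1,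
       (moves.foldl (pvStepB p d0) ([], d)).2) := by
  induction moves generalizing acc d with
  | nil => simp
  | cons m ms ih =>
    simp only [List.foldl_cons]
    by_cases hc : 0 ≤ p.1 + m.1 ∧ p.1 + m.1 ≤ 7 ∧ 0 ≤ p.2 + m.2 ∧ p.2 + m.2 ≤ 7 ∧
        pvDGetB d ((p.2 + m.2) * 8 + (p.1 + m.1)) < 0
    · rw [show pvStepB p d0 (acc, d) m = (acc ++ [(p.1 + m.1, p.2 + m.2)],
            PySem.List.pySetD d ((p.2 + m.2) * 8 + (p.1 + m.1)) (d0 + 1)) from by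
          simp only [pvStepB]; rw [if_pos hc],
          show pvStepB p d0 ([], d) m = ([(p.1 + m.1, p.2 + m.2)],
            PySem.List.pySetD d ((p.2 + m.2) * 8 + (p.1 + m.1)) (d0 + 1)) from by
          simp only [pvStepB]; rw [if_pos hc]; rfl]
      rw [ih, ih [(p.1 + m.1, p.2 + m.2)]]
      simp [List.append_assoc]
    · rw [show pvStepB p d0 (acc, d) m = (acc, d) from by
          simp only [pvStepB]; rw [if_neg hc],
          show pvStepB p d0 ([], d) m = ([], d) from by
          simp only [pvStepB]; rw [if_neg hc]]
      exact ih acc d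

-- A's move fold only appends to the queue, and the board part ignores it
lemma pvShiftA (moves : List (Int × Int)) (x y turn : Int)
    (q0 : List (Int × Int × Int)) (b : List (List Int)) :
    moves.foldl (pvStepA x y turn) (q0, b) =
      (q0 ++ (moves.foldl (pvStepA x y turn) ([], b)).1,
       (moves.foldl (pvStepA x y turn) ([], b)).2) := by
  induction moves generalizing q0 b with
  | nil => simp
  | cons m ms ih =>
    simp only [List.foldl_cons]
    by_cases h1 : x + m.1 < 0 ∨ x + m.1 > 7 ∨ y + m.2 < 0 ∨ y + m.2 > 7
    · rw [show pvStepA x y turn (q0, b) m = (q0, b) from by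
          simp only [pvStepA]; rw [if_pos h1],
          show pvStepA x y turn ([], b) m = ([], b) from by
          simp only [pvStepA]; rw [if_pos h1]]
      exact ih q0 b
    · by_cases h2 : pvBGetA b (y + m.2) (x + m.1) ≥ 0
      · rw [show pvStepA x y turn (q0, b) m = (q0, b) from by
            simp only [pvStepA]; rw [if_neg h1, if_pos h2],
            show pvStepA x y turn ([], b) m = ([], b) from by
            simp only [pvStepA]; rw [if_neg h1, if_pos h2]]
        exact ih q0 b
      · rw [show pvStepA x y turn (q0, b) m = (q0 ++ [(x + m.1, y + m.2, turn + 1)],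
              pvBSetA b (y + m.2) (x + m.1) (turn + 1)) from by
            simp only [pvStepA]; rw [if_neg h1, if_neg h2],
            show pvStepA x y turn ([], b) m = ([(x + m.1, y + m.2, turn + 1)],
              pvBSetA b (y + m.2) (x + m.1) (turn + 1)) from by
            simp only [pvStepA]; rw [if_neg h1, if_neg h2]; rfl]
        rw [ih, ih [(x + m.1, y + m.2, turn + 1)]]
        simp [List.append_assoc]

-- the frontier level fold shifts over its accumulator the same way
lemma pvShiftLvl (fr : List (Int × Int)) (d0 : Int)
    (acc : List (Int × Int)) (d : List Int) :
    fr.foldl (fun st q => pvMovesB.foldl (pvStepB q d0) st) (acc, d) =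
      (acc ++ (fr.foldl (fun st q => pvMovesB.foldl (pvStepB q d0) st) ([], d)).1,
       (fr.foldl (fun st q => pvMovesB.foldl (pvStepB q d0) st) ([], d)).2) := by
  induction fr generalizing acc d with
  | nil => simp
  | cons q qs ih =>
    simp only [List.foldl_cons]
    rw [pvShiftB pvMovesB q d0 acc d]
    rw [ih, ih (pvMovesB.foldl (pvStepB q d0) ([], d)).1]
    simp [List.append_assoc]

-- relaxing the 8 moves of one popped cell: A and the frontier BFS discover the same cells in
-- the same order, keep corresponding boards, and every discovery kills one negative cell
lemma pvInner (moves : List (Int × Int)) (p : Int × Int) (lvl : Int)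
    (b : List (List Int)) (d : List Int) (hrel : pvRel b d) (hlvl : 0 ≤ lvl) :
    (moves.foldl (pvStepA p.1 p.2 lvl) ([], b)).1
        = ((moves.foldl (pvStepB p lvl) ([], d)).1).map (pvTT (lvl + 1))
      ∧ pvRel (moves.foldl (pvStepA p.1 p.2 lvl) ([], b)).2
          (moves.foldl (pvStepB p lvl) ([], d)).2
      ∧ ((moves.foldl (pvStepB p lvl) ([], d)).1).length
          + pvNeg (moves.foldl (pvStepB p lvl) ([], d)).2 = pvNeg d := by
  induction moves generalizing b d with
  | nil => exact ⟨rfl, hrel, by simp⟩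
  | cons m ms ih =>
    simp only [List.foldl_cons]
    by_cases h1 : p.1 + m.1 < 0 ∨ p.1 + m.1 > 7 ∨ p.2 + m.2 < 0 ∨ p.2 + m.2 > 7
    · rw [show pvStepA p.1 p.2 lvl ([], b) m = ([], b) from by
          simp only [pvStepA]; rw [if_pos h1],
          show pvStepB p lvl ([], d) m = ([], d) from by
          simp only [pvStepB]; rw [if_neg (by omega)]]
      exact ih b d hrel
    · have hx1 : 0 ≤ p.1 + m.1 := by omega
      have hx2 : p.1 + m.1 < 8 := by omega
      have hy1 : 0 ≤ p.2 + m.2 := by omega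
      have hy2 : p.2 + m.2 < 8 := by omega
      have hread := hrel.2.2.2 (p.2 + m.2) (p.1 + m.1) hy1 hy2 hx1 hx2
      by_cases h2 : pvBGetA b (p.2 + m.2) (p.1 + m.1) ≥ 0
      · rw [show pvStepA p.1 p.2 lvl ([], b) m = ([], b) from by
            simp only [pvStepA]; rw [if_neg h1, if_pos h2],
            show pvStepB p lvl ([], d) m = ([], d) from by
            simp only [pvStepB]; rw [if_neg (by rintro ⟨_, _, _, _, hlt⟩; omega)]]
        exact ih b d hrel
      · have hlen : d.length = 64 := hrel.2.2.1
        rw [show pvStepA p.1 p.2 lvl ([], b) m = ([(p.1 + m.1, p.2 + m.2, lvl + 1)],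
              pvBSetA b (p.2 + m.2) (p.1 + m.1) (lvl + 1)) from by
            simp only [pvStepA]; rw [if_neg h1, if_neg h2]; rfl,
            show pvStepB p lvl ([], d) m = ([(p.1 + m.1, p.2 + m.2)],
              PySem.List.pySetD d ((p.2 + m.2) * 8 + (p.1 + m.1)) (lvl + 1)) from by
            simp only [pvStepB]
            rw [if_pos ⟨hx1, by omega, hy1, by omega, by omega⟩]
            rfl]
        have hrel1 := pvRel_write b d (p.2 + m.2) (p.1 + m.1) (lvl + 1) hrel hy1 hy2 hx1 hx2
        obtain ⟨ih1, ih2, ih3⟩ := ih _ _ hrel1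
        have hneg : pvNeg (PySem.List.pySetD d ((p.2 + m.2) * 8 + (p.1 + m.1)) (lvl + 1)) + 1
            = pvNeg d :=
          pvNeg_set d ((p.2 + m.2) * 8 + (p.1 + m.1)) (lvl + 1) hlen (by omega) (by omega)
            (by omega) (by omega)
        rw [pvShiftA ms p.1 p.2 lvl [(p.1 + m.1, p.2 + m.2, lvl + 1)] _,
            pvShiftB ms p lvl [(p.1 + m.1, p.2 + m.2)] _]
        refine ⟨?_, by simpa using ih2, ?_⟩
        · simp only [List.map_append]
          rw [ih1]
          rfl
        · simp only [List.length_append, List.length_cons, List.length_nil]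
          omega

-- A pops the remaining cells of the current level one by one and ends the level with
-- exactly the frontier BFS's next frontier appended to its queue
lemma pvMid (cur : List (Int × Int)) (tail : List (Int × Int))
    (b : List (List Int)) (d : List Int) (lvl : Int) (f : Nat)
    (hrel : pvRel b d) (hlvl : 0 ≤ lvl)
    (hf : cur.length + tail.length + pvNeg d ≤ f) :
    ∃ b', pvBfsA f (cur.map (pvTT lvl) ++ tail.map (pvTT (lvl + 1))) b
        = pvBfsA (f - cur.length)
            ((tail ++ (cur.foldl (fun st q => pvMovesB.foldl (pvStepB q lvl) st) ([], d)).1).map (pvTT (lvl + 1))) b'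
      ∧ pvRel b' (cur.foldl (fun st q => pvMovesB.foldl (pvStepB q lvl) st) ([], d)).2
      ∧ (cur.foldl (fun st q => pvMovesB.foldl (pvStepB q lvl) st) ([], d)).1.length
          + pvNeg (cur.foldl (fun st q => pvMovesB.foldl (pvStepB q lvl) st) ([], d)).2
        = pvNeg d := by
  induction cur generalizing tail b d f with
  | nil =>
    refine ⟨b, ?_, hrel, by simp⟩
    simp
  | cons c cur' ih =>
    cases f with
    | zero => simp at hf
    | succ g =>
      have hmv : pvMovesA = pvMovesB := by decide
      have hinner := pvInner pvMovesB c lvl b d hrel hlvl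
      obtain ⟨hi1, hi2, hi3⟩ := hinner
      have hstep : ((c :: cur').map (pvTT lvl) ++ tail.map (pvTT (lvl + 1)))
          = (c.1, c.2, lvl) :: (cur'.map (pvTT lvl) ++ tail.map (pvTT (lvl + 1))) := by
        simp [pvTT]
      rw [hstep, pvBfsA_cons g c.1 c.2 lvl _ b, hmv,
          pvShiftA pvMovesB c.1 c.2 lvl _ b]
      have hq : (cur'.map (pvTT lvl) ++ tail.map (pvTT (lvl + 1))
            ++ (pvMovesB.foldl (pvStepA c.1 c.2 lvl) ([], b)).1)
          = cur'.map (pvTT lvl)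
            ++ ((tail ++ (pvMovesB.foldl (pvStepB c lvl) ([], d)).1).map (pvTT (lvl + 1))) := by
        rw [hi1]
        simp [List.append_assoc]
      simp only []
      rw [hq]
      obtain ⟨b', heq, hrel', hcnt⟩ := ih (tail ++ (pvMovesB.foldl (pvStepB c lvl) ([], d)).1)
        (pvMovesB.foldl (pvStepA c.1 c.2 lvl) ([], b)).2
        (pvMovesB.foldl (pvStepB c lvl) ([], d)).2 g hi2
        (by simp only [List.length_cons, List.length_append] at hf ⊢; omega)
      refine ⟨b', ?_, ?_, ?_⟩
      · rw [heq]
        have hfold : (c :: cur').foldl (fun st q => pvMovesB.foldl (pvStepB q lvl) st) ([], d)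
            = ((pvMovesB.foldl (pvStepB c lvl) ([], d)).1
                ++ (cur'.foldl (fun st q => pvMovesB.foldl (pvStepB q lvl) st)
                    ([], (pvMovesB.foldl (pvStepB c lvl) ([], d)).2)).1,
               (cur'.foldl (fun st q => pvMovesB.foldl (pvStepB q lvl) st)
                    ([], (pvMovesB.foldl (pvStepB c lvl) ([], d)).2)).2) := by
          rw [List.foldl_cons]
          rw [show pvMovesB.foldl (pvStepB c lvl) ([], d)
              = ((pvMovesB.foldl (pvStepB c lvl) ([], d)).1,
                 (pvMovesB.foldl (pvStepB c lvl) ([], d)).2) from rfl]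
          exact pvShiftLvl cur' lvl _ _
        rw [hfold]
        simp only [List.length_cons]
        rw [show g + 1 - (cur'.length + 1) = g - cur'.length from by omega]
        congr 2
        simp [List.append_assoc]
      · have hfold2 : ((c :: cur').foldl (fun st q => pvMovesB.foldl (pvStepB q lvl) st) ([], d)).2
            = (cur'.foldl (fun st q => pvMovesB.foldl (pvStepB q lvl) st)
                ([], (pvMovesB.foldl (pvStepB c lvl) ([], d)).2)).2 := by
          rw [List.foldl_cons]
          rw [show pvMovesB.foldl (pvStepB c lvl) ([], d)
              = ((pvMovesB.foldl (pvStepB c lvl) ([], d)).1,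
                 (pvMovesB.foldl (pvStepB c lvl) ([], d)).2) from rfl]
          rw [pvShiftLvl cur' lvl _ _]
        rw [hfold2]
        exact hrel'
      · have hfold : (c :: cur').foldl (fun st q => pvMovesB.foldl (pvStepB q lvl) st) ([], d)
            = ((pvMovesB.foldl (pvStepB c lvl) ([], d)).1
                ++ (cur'.foldl (fun st q => pvMovesB.foldl (pvStepB q lvl) st)
                    ([], (pvMovesB.foldl (pvStepB c lvl) ([], d)).2)).1,
               (cur'.foldl (fun st q => pvMovesB.foldl (pvStepB q lvl) st)
                    ([], (pvMovesB.foldl (pvStepB c lvl) ([], d)).2)).2) := by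
          rw [List.foldl_cons]
          rw [show pvMovesB.foldl (pvStepB c lvl) ([], d)
              = ((pvMovesB.foldl (pvStepB c lvl) ([], d)).1,
                 (pvMovesB.foldl (pvStepB c lvl) ([], d)).2) from rfl]
          exact pvShiftLvl cur' lvl _ _
        rw [hfold]
        simp only [List.length_append]
        omega

-- level-by-level alignment of A's deque loop with the frontier loop: the final boards agree
lemma pvLevel : ∀ (k : Nat) (frontier : List (Int × Int)) (b : List (List Int))
    (d : List Int) (lvl : Int) (fA fB : Nat),
    pvRel b d → 0 ≤ lvl → pvNeg d ≤ k →
    frontier.length + pvNeg d ≤ fA → 1 + pvNeg d ≤ fB →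
    ∀ y x : Int, 0 ≤ y → y < 8 → 0 ≤ x → x < 8 →
      pvBGetA (pvBfsA fA (frontier.map (pvTT lvl)) b) y x
        = pvDGetB (pvFrBfs fB frontier d lvl) (y * 8 + x) := by
  intro k
  induction k with
  | zero =>
    intro frontier b d lvl fA fB hrel hlvl hk hfa hfb y x hy1 hy2 hx1 hx2
    cases frontier with
    | nil =>
      rw [List.map_nil, pvBfsA_nil, pvFrBfs_nil]
      exact hrel.2.2.2 y x hy1 hy2 hx1 hx2
    | cons p fr =>
      cases fB with
      | zero => omega
      | succ gB =>
        rw [pvFrBfs_cons gB p fr d lvl]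
        obtain ⟨b', heq, hrel', hcnt⟩ := pvMid (p :: fr) [] b d lvl fA hrel hlvl
          (by simpa using hfa)
        simp only [List.map_nil, List.append_nil, List.nil_append] at heq
        rw [heq]
        have hnxt : ((p :: fr).foldl (fun st q => pvMovesB.foldl (pvStepB q lvl) st) ([], d)).1
            = [] := by
          rcases h : ((p :: fr).foldl (fun st q => pvMovesB.foldl (pvStepB q lvl) st) ([], d)).1
            with _ | _
          · rfl
          · rw [h] at hcnt; simp at hcnt; omega
        rw [hnxt, List.map_nil, pvBfsA_nil, pvFrBfs_nil]
        exact hrel'.2.2.2 y x hy1 hy2 hx1 hx2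
  | succ n ih =>
    intro frontier b d lvl fA fB hrel hlvl hk hfa hfb y x hy1 hy2 hx1 hx2
    cases frontier with
    | nil =>
      rw [List.map_nil, pvBfsA_nil, pvFrBfs_nil]
      exact hrel.2.2.2 y x hy1 hy2 hx1 hx2
    | cons p fr =>
      cases fB with
      | zero => omega
      | succ gB =>
        rw [pvFrBfs_cons gB p fr d lvl]
        obtain ⟨b', heq, hrel', hcnt⟩ := pvMid (p :: fr) [] b d lvl fA hrel hlvl
          (by simpa using hfa)
        simp only [List.map_nil, List.append_nil, List.nil_append] at heq
        rw [heq]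
        rcases hn : ((p :: fr).foldl (fun st q => pvMovesB.foldl (pvStepB q lvl) st) ([], d)).1
          with _ | ⟨q, qs⟩
        · rw [List.map_nil, pvBfsA_nil, pvFrBfs_nil]
          exact hrel'.2.2.2 y x hy1 hy2 hx1 hx2
        · rw [hn] at hcnt
          refine ih (q :: qs) b' _ (lvl + 1) _ gB hrel' (by omega) ?_ ?_ ?_ y x hy1 hy2 hx1 hx2
          · simp only [List.length_cons] at hcnt; omega
          · simp only [List.length_cons] at hcnt ⊢
            simp only [List.length_cons] at hfa
            omega
          · simp only [List.length_cons] at hcnt; omega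

-- the two farthest-square scans agree whenever every in-range read agrees
lemma pvScan_eq (b : List (List Int)) (d : List Int)
    (h : ∀ y x : Int, 0 ≤ y → y < 8 → 0 ≤ x → x < 8 →
      pvBGetA b y x = pvDGetB d (y * 8 + x)) :
    pvScanA b = pvScanB d := by
  unfold pvScanA pvScanB
  rw [show (PySem.List.pyRange 0 8 1).reverse = PySem.List.pyRange 7 (-1) (-1) from by decide]
  apply PySem.List.foldl_congr_mem
  intro acc y hy
  apply PySem.List.foldl_congr_mem
  intro acc2 x hx
  have hyb := PySem.List.mem_pyRange_neg_one.mp hy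
  have hxb := PySem.List.mem_pyRange_one.mp hx
  rw [h y x (by omega) (by omega) (by omega) (by omega),
      show pvColsA = pvColsB from by decide]

-- the two initial boards correspond (row -1, Python's wrap-around, writes row 7 on
-- the nested board and cell 56+col on the flat board)
lemma pvInitSet (rn cn : Nat) (hrn : rn < 8) (hcn : cn < 8) :
    pvRel ((List.replicate 8 (List.replicate 8 (-1 : Int))).set rn
            ((List.replicate 8 (-1 : Int)).set cn 0))
          ((List.replicate 64 (-1 : Int)).set (rn * 8 + cn) 0) := by
  refine ⟨by simp, ?_, by simp, ?_⟩
  · intro r hr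
    rcases List.mem_or_eq_of_mem_set hr with hmem | heq
    · rw [List.eq_of_mem_replicate hmem]; simp
    · rw [heq]; simp
  · intro y x hy1 hy2 hx1 hx2
    unfold pvBGetA pvDGetB
    rw [show y = ((y.toNat : Nat) : Int) from by omega,
        show x = ((x.toNat : Nat) : Int) from by omega,
        ← PySem.List.pySetD_natCast _ rn,
        ← PySem.List.pySetD_natCast _ cn,
        ← PySem.List.pySetD_natCast _ (rn * 8 + cn),
        PySem.List.pyGetD_pySetD_natCast _ rn y.toNat _ [] (by simp; omega),
        show ((y.toNat : Nat) : Int) * 8 + ((x.toNat : Nat) : Int)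
          = (((y.toNat * 8 + x.toNat : Nat) : Nat) : Int) from by push_cast; ring,
        PySem.List.pyGetD_pySetD_natCast _ (rn * 8 + cn) (y.toNat * 8 + x.toNat) _ (-1)
          (by simp; omega)]
    by_cases hyy : y.toNat = rn
    · rw [if_pos hyy,
          PySem.List.pyGetD_pySetD_natCast _ cn x.toNat _ (-1) (by simp; omega)]
      by_cases hxx : x.toNat = cn
      · rw [if_pos hxx, if_pos (by omega)]
      · rw [if_neg hxx, if_neg (by omega), pvRowAt _ x.toNat (-1) (by simp; omega),
            pvRowAt _ (y.toNat * 8 + x.toNat) (-1) (by simp; omega)]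
        rw [List.getElem_replicate, List.getElem_replicate]
    · rw [if_neg hyy, if_neg (by omega), pvRowAt _ y.toNat [] (by simp; omega),
          pvRowAt _ (y.toNat * 8 + x.toNat) (-1) (by simp; omega),
          List.getElem_replicate, List.getElem_replicate,
          pvRowAt _ x.toNat (-1) (by simp; omega), List.getElem_replicate]

lemma pvInit (col row : Int) (hc1 : 0 ≤ col) (hc2 : col < 8)
    (hr1 : -1 ≤ row) (hr2 : row < 8) :
    pvRel (pvBSetA (List.replicate 8 (List.replicate 8 (-1 : Int))) row col 0)
      (PySem.List.pySetD (List.replicate 64 (-1 : Int)) (row * 8 + col) 0) := by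
  have hrepl : PySem.List.pyGetD (List.replicate 8 (List.replicate 8 (-1 : Int))) row []
      = List.replicate 8 (-1 : Int) := by
    have := pvGetRepl 8 (List.replicate 8 (-1 : Int)) ([] : List Int) row (by push_cast; omega)
      (by push_cast; omega)
    exact this
  have hinner : PySem.List.pySetD (List.replicate 8 (-1 : Int)) col 0
      = (List.replicate 8 (-1 : Int)).set col.toNat 0 := PySem.List.pySetD_of_nonneg _ _ hc1
  by_cases hneg : row = -1
  · subst hneg
    have hA : pvBSetA (List.replicate 8 (List.replicate 8 (-1 : Int))) (-1) col 0
        = (List.replicate 8 (List.replicate 8 (-1 : Int))).set 7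
            ((List.replicate 8 (-1 : Int)).set col.toNat 0) := by
      unfold pvBSetA
      rw [hrepl, hinner, pvSetNeg _ _ _ (by simp) (by omega)]
      rfl
    have hB : PySem.List.pySetD (List.replicate 64 (-1 : Int)) ((-1) * 8 + col) 0
        = (List.replicate 64 (-1 : Int)).set (7 * 8 + col.toNat) 0 := by
      rw [pvSetNeg _ _ _ (by simp; omega) (by omega)]
      congr 1
      simp
      omega
    rw [hA, hB]
    exact pvInitSet 7 col.toNat (by omega) (by omega)
  · have hr0 : 0 ≤ row := by omega
    have hA : pvBSetA (List.replicate 8 (List.replicate 8 (-1 : Int))) row col 0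
        = (List.replicate 8 (List.replicate 8 (-1 : Int))).set row.toNat
            ((List.replicate 8 (-1 : Int)).set col.toNat 0) := by
      unfold pvBSetA
      rw [hrepl, hinner, PySem.List.pySetD_of_nonneg _ _ hr0]
    have hB : PySem.List.pySetD (List.replicate 64 (-1 : Int)) (row * 8 + col) 0
        = (List.replicate 64 (-1 : Int)).set (row.toNat * 8 + col.toNat) 0 := by
      rw [PySem.List.pySetD_of_nonneg _ _ (by omega)]
      congr 1
      omega
    rw [hA, hB]
    exact pvInitSet row.toNat col.toNat (by omega) (by omega)

-- A's run from the parsed square equals the frontier run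
lemma pvRun_eq (col row : Int) (hc1 : 0 ≤ col) (hc2 : col < 8)
    (hr1 : -1 ≤ row) (hr2 : row < 8) :
    pvRunA col row = pvFrRun col row := by
  have hinit := pvInit col row hc1 hc2 hr1 hr2
  have hlen : (PySem.List.pySetD (List.replicate 64 (-1 : Int)) (row * 8 + col) 0).length = 64 :=
    hinit.2.2.1
  have hnegle : pvNeg (PySem.List.pySetD (List.replicate 64 (-1 : Int)) (row * 8 + col) 0) ≤ 64 := by
    unfold pvNeg
    calc List.countP _ _ ≤ _ := List.countP_le_length
    _ = 64 := hlen
  unfold pvRunA pvFrRun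
  apply pvScan_eq
  intro y x hy1 hy2 hx1 hx2
  rw [show ([(col, row, 0)] : List (Int × Int × Int)) = [((col, row) : Int × Int)].map (pvTT 0)
      from by simp [pvTT]]
  exact pvLevel (pvNeg (PySem.List.pySetD (List.replicate 64 (-1 : Int)) (row * 8 + col) 0))
    [(col, row)] _ _ 0 100 100 hinit le_rfl le_rfl
    (by simp only [List.length_cons, List.length_nil]; omega) (by omega)
    y x hy1 hy2 hx1 hx2

-- parsing agreement: for any valid square A runs on the same column and row as the frontier BFS
lemma pvGo_eq (c0 c1 : Char) (h0 : c0 ∈ pvColsA)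
    (h1 : c1 ∈ (['0','1','2','3','4','5','6','7','8'] : List Char)) :
    pvGoA c0 c1 = pvFrGo c0 c1 := by
  unfold pvGoA pvFrGo
  rw [show pvColsB = pvColsA from by decide]
  cases hidx : PySem.List.index? pvColsA c0 with
  | none => exact absurd ((PySem.List.index?_eq_none_iff _ _).mp hidx) (by simpa using h0)
  | some kcol =>
    obtain ⟨hk, -, -⟩ := PySem.List.getElem_of_index?_eq_some hidx
    have hk8 : kcol < 8 := by simpa using hk
    fin_cases h1 <;>
      simp only [show PySem.Int.ofChars? ['0'] = some 0 from by decide,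
        show PySem.Int.ofChars? ['1'] = some 1 from by decide,
        show PySem.Int.ofChars? ['2'] = some 2 from by decide,
        show PySem.Int.ofChars? ['3'] = some 3 from by decide,
        show PySem.Int.ofChars? ['4'] = some 4 from by decide,
        show PySem.Int.ofChars? ['5'] = some 5 from by decide,
        show PySem.Int.ofChars? ['6'] = some 6 from by decide,
        show PySem.Int.ofChars? ['7'] = some 7 from by decide,
        show PySem.Int.ofChars? ['8'] = some 8 from by decide] <;>
      exact pvRun_eq _ _ (by omega) (by omega) (by omega) (by omega)

lemma pvPort_eq (c0 c1 : Char) (rest : List Char) (s : String)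
    (hs : s.toList = c0 :: c1 :: rest) :
    get_hiding_places s = pvGoA c0 c1 ∧ get_hiding_places_alt s = pvGoP c0 c1 := by
  have h0 : PySem.List.pyGet? (c0 :: c1 :: rest) (0:Int) = some c0 := by
    simp [PySem.List.pyGet?_zero_cons]
  constructor <;>
    simp [get_hiding_places, get_hiding_places_alt, PySem.Str.pyGet?, hs,
      PySem.Chars.pyGet?_eq_listPyGet?, h0]

-- ---------- part 2: the frontier BFS equals B's wavefront sweep loop ----------

-- coordinates of a flat cell, targets of a move, on-board test, flat index
def pvCell (c : Int) : Int × Int := (PySem.Int.mod c 8, PySem.Int.floordiv c 8)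
def pvTgt (q m : Int × Int) : Int × Int := (q.1 + m.1, q.2 + m.2)
def pvOnB (p : Int × Int) : Bool :=
  decide (0 ≤ p.1) && decide (p.1 ≤ 7) && decide (0 ≤ p.2) && decide (p.2 ≤ 7)
def pvIdx (p : Int × Int) : Int := p.2 * 8 + p.1

-- cell c is markable in this round: unvisited, with a knight neighbour at value d
def pvMark (dist : List Int) (d c : Int) : Bool :=
  decide (pvDGetB dist c < 0) && pvMovesB.any (fun m =>
    pvOnB (pvTgt (pvCell c) m) && decide (pvDGetB dist (pvIdx (pvTgt (pvCell c) m)) = d))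

-- the canonical board after one wavefront round
def pvSpec (dist : List Int) (d : Int) : List Int :=
  List.ofFn (fun i : Fin 64 => if pvMark dist d ((i.val : Nat) : Int) then d + 1
    else pvDGetB dist ((i.val : Nat) : Int))

-- reachability of flat cell c from a cell / a cell list by the move list ms
def pvAdjM (q : Int × Int) (ms : List (Int × Int)) (c : Int) : Bool :=
  ms.any (fun m => pvOnB (pvTgt q m) && decide (pvIdx (pvTgt q m) = c))
def pvAdjC (cur : List (Int × Int)) (c : Int) : Bool := cur.any (fun q => pvAdjM q pvMovesB c)

-- the pull step of B's sweep, as a named function (definitionally the lambda in pvPullSweep)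
def pvPStep (d : Int) (st : List Int × Bool) (i : Int) : List Int × Bool :=
  if pvDGetB st.1 i < 0 then
    let x := PySem.Int.mod i 8
    let y := PySem.Int.floordiv i 8
    if pvMovesB.any (fun m => decide (0 ≤ x + m.1 ∧ x + m.1 ≤ 7 ∧ 0 ≤ y + m.2 ∧ y + m.2 ≤ 7 ∧
        pvDGetB st.1 ((y + m.2) * 8 + (x + m.1)) = d)) then
      (PySem.List.pySetD st.1 i (d + 1), true)
    else st
  else st

lemma pvOnB_iff (p : Int × Int) :
    pvOnB p = true ↔ (0 ≤ p.1 ∧ p.1 ≤ 7 ∧ 0 ≤ p.2 ∧ p.2 ≤ 7) := by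
  simp [pvOnB, and_assoc]

lemma pvCell_mod (c : Int) : pvCell c = (c % 8, c / 8) := by
  unfold pvCell
  rw [PySem.Int.mod_eq_emod_of_pos (by norm_num : (0:Int) < 8),
      PySem.Int.floordiv_eq_ediv_of_pos (by norm_num : (0:Int) < 8)]

lemma pvCell_coords (c : Int) (h1 : 0 ≤ c) (h2 : c < 64) :
    pvOnB (pvCell c) = true ∧ pvIdx (pvCell c) = c := by
  rw [pvCell_mod, pvOnB_iff]
  unfold pvIdx
  dsimp only
  omega

lemma pvIdx_inj (p r : Int × Int) (hp : pvOnB p = true) (hr : pvOnB r = true)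
    (h : pvIdx p = pvIdx r) : p = r := by
  rw [pvOnB_iff] at hp hr
  unfold pvIdx at h
  exact Prod.ext (by omega) (by omega)

lemma pvCell_idx (p : Int × Int) (hp : pvOnB p = true) : pvCell (pvIdx p) = p := by
  have hb : 0 ≤ pvIdx p ∧ pvIdx p < 64 := by
    rw [pvOnB_iff] at hp; unfold pvIdx; omega
  have := pvCell_coords (pvIdx p) hb.1 hb.2
  exact pvIdx_inj _ _ this.1 hp this.2

lemma pvIdx_range (p : Int × Int) (hp : pvOnB p = true) : 0 ≤ pvIdx p ∧ pvIdx p < 64 := by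
  rw [pvOnB_iff] at hp; unfold pvIdx; omega

-- the move list is closed under negation
lemma pvMovesNeg : ∀ m ∈ pvMovesB, ((-m.1, -m.2) : Int × Int) ∈ pvMovesB := by decide

lemma pvSpec_length (dist : List Int) (d : Int) : (pvSpec dist d).length = 64 := by
  simp [pvSpec]

lemma pvSpec_get (dist : List Int) (d c : Int) (h1 : 0 ≤ c) (h2 : c < 64) :
    pvDGetB (pvSpec dist d) c = if pvMark dist d c then d + 1 else pvDGetB dist c := by
  have hl : c.toNat < (pvSpec dist d).length := by rw [pvSpec_length]; omega
  conv_lhs => rw [show c = ((c.toNat : Nat) : Int) from by omega]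
  unfold pvDGetB
  rw [pvRowAt _ c.toNat (-1) hl]
  unfold pvSpec
  rw [List.getElem_ofFn]
  rw [show (((⟨c.toNat, by omega⟩ : Fin 64).val : Nat) : Int) = c from by simp; omega]
  rfl

-- extensionality through pvDGetB for 64-cell boards
lemma pvExt64 (xs ys : List Int) (hx : xs.length = 64) (hy : ys.length = 64)
    (h : ∀ c : Int, 0 ≤ c → c < 64 → pvDGetB xs c = pvDGetB ys c) : xs = ys := by
  apply List.ext_getElem (by rw [hx, hy])
  intro n h1 h2
  have hn : ((n : Nat) : Int) = (n : Int) := rfl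
  have := h n (by omega) (by omega)
  unfold pvDGetB at this
  rw [show (n : Int) = ((n : Nat) : Int) from rfl, pvRowAt xs n (-1) h1,
      pvRowAt ys n (-1) h2] at this
  exact this

-- characterization of one inner (8-move) push fold
lemma pvPushInner (d : Int) (hd : 0 ≤ d) (q : Int × Int) :
    ∀ (ms : List (Int × Int)) (acc : List (Int × Int)) (arr : List Int),
    arr.length = 64 →
    (ms.foldl (pvStepB q d) (acc, arr)).2.length = 64 ∧
    (∀ c : Int, 0 ≤ c → c < 64 →
      pvDGetB (ms.foldl (pvStepB q d) (acc, arr)).2 c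
        = if pvDGetB arr c < 0 ∧ pvAdjM q ms c then d + 1 else pvDGetB arr c) ∧
    (∀ p : Int × Int, p ∈ (ms.foldl (pvStepB q d) (acc, arr)).1 ↔
      p ∈ acc ∨ (pvOnB p = true ∧ pvDGetB arr (pvIdx p) < 0 ∧ pvAdjM q ms (pvIdx p) = true)) := by
  intro ms
  induction ms with
  | nil =>
    intro acc arr hlen
    simp only [List.foldl_nil]
    refine ⟨hlen, ?_, ?_⟩
    · intro c hc1 hc2
      rw [if_neg (by rintro ⟨-, hadj⟩; simp [pvAdjM] at hadj)]
    · intro p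
      simp [pvAdjM]
  | cons m ms ih =>
    intro acc arr hlen
    simp only [List.foldl_cons]
    have hadjc : ∀ c : Int, (pvAdjM q (m :: ms) c = true) ↔
        ((pvOnB (pvTgt q m) = true ∧ pvIdx (pvTgt q m) = c) ∨ pvAdjM q ms c = true) := by
      intro c
      simp [pvAdjM, List.any_cons, Bool.or_eq_true, Bool.and_eq_true]
    have htgt1 : (pvTgt q m).1 = q.1 + m.1 := rfl
    have htgt2 : (pvTgt q m).2 = q.2 + m.2 := rfl
    have hidxt : pvIdx (pvTgt q m) = (q.2 + m.2) * 8 + (q.1 + m.1) := rfl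
    by_cases hC : 0 ≤ q.1 + m.1 ∧ q.1 + m.1 ≤ 7 ∧ 0 ≤ q.2 + m.2 ∧ q.2 + m.2 ≤ 7 ∧
        pvDGetB arr ((q.2 + m.2) * 8 + (q.1 + m.1)) < 0
    · rw [show pvStepB q d (acc, arr) m = (acc ++ [(q.1 + m.1, q.2 + m.2)],
          PySem.List.pySetD arr ((q.2 + m.2) * 8 + (q.1 + m.1)) (d + 1)) from by
        simp only [pvStepB]; rw [if_pos hC]]
      have honbt : pvOnB (pvTgt q m) = true := by
        rw [pvOnB_iff, htgt1, htgt2]; exact ⟨hC.1, hC.2.1, hC.2.2.1, hC.2.2.2.1⟩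
      have hi0 : 0 ≤ (q.2 + m.2) * 8 + (q.1 + m.1) ∧ (q.2 + m.2) * 8 + (q.1 + m.1) < 64 := by
        obtain ⟨a1, a2, a3, a4, -⟩ := hC; omega
      have hlen2 : (PySem.List.pySetD arr ((q.2 + m.2) * 8 + (q.1 + m.1)) (d + 1)).length = 64 := by
        rw [PySem.List.length_pySetD]; exact hlen
      have hget2 : ∀ c : Int, 0 ≤ c → c < 64 →
          pvDGetB (PySem.List.pySetD arr ((q.2 + m.2) * 8 + (q.1 + m.1)) (d + 1)) c
            = if c = (q.2 + m.2) * 8 + (q.1 + m.1) then d + 1 else pvDGetB arr c := by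
        intro c hc1 hc2
        exact pvDSet_get arr _ c (d + 1) hlen hi0.1 hi0.2 hc1 hc2
      obtain ⟨ih1, ih2, ih3⟩ := ih (acc ++ [(q.1 + m.1, q.2 + m.2)]) _ hlen2
      refine ⟨ih1, ?_, ?_⟩
      · intro c hc1 hc2
        rw [ih2 c hc1 hc2, hget2 c hc1 hc2]
        by_cases hc0 : c = (q.2 + m.2) * 8 + (q.1 + m.1)
        · rw [if_pos hc0]
          rw [if_neg (by rintro ⟨hlt, -⟩; omega)]
          rw [if_pos ⟨by rw [hc0]; exact hC.2.2.2.2,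
            (hadjc c).mpr (Or.inl ⟨honbt, by rw [hidxt, hc0]⟩)⟩]
        · rw [if_neg hc0]
          by_cases hcnd : pvDGetB arr c < 0 ∧ pvAdjM q ms c = true
          · rw [if_pos hcnd, if_pos ⟨hcnd.1, (hadjc c).mpr (Or.inr hcnd.2)⟩]
          · rw [if_neg hcnd]
            rw [if_neg (by
              rintro ⟨hlt, hadj⟩
              rcases (hadjc c).mp hadj with ⟨-, hic⟩ | hms
              · exact hc0 (by rw [← hic, hidxt])
              · exact hcnd ⟨hlt, hms⟩)]
      · intro p
        rw [ih3 p]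
        by_cases hpt : p = (q.1 + m.1, q.2 + m.2)
        · subst hpt
          have hidxp : pvIdx (q.1 + m.1, q.2 + m.2) = (q.2 + m.2) * 8 + (q.1 + m.1) := rfl
          constructor
          · intro _
            exact Or.inr ⟨honbt, by rw [hidxp]; exact hC.2.2.2.2,
              (hadjc _).mpr (Or.inl ⟨honbt, by rw [hidxt, hidxp]⟩)⟩
          · intro _
            exact Or.inl (by simp)
        · have hmem : p ∈ acc ++ [(q.1 + m.1, q.2 + m.2)] ↔ p ∈ acc := by
            simp [hpt]
          rw [hmem]
          apply or_congr Iff.rfl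
          constructor
          · rintro ⟨honb, hlt, hadj⟩
            have hne : pvIdx p ≠ (q.2 + m.2) * 8 + (q.1 + m.1) := by
              intro he
              exact hpt (pvIdx_inj p _ honb honbt (by rw [he]; rfl))
            obtain ⟨hr1, hr2⟩ := pvIdx_range p honb
            rw [hget2 _ hr1 hr2, if_neg hne] at hlt
            exact ⟨honb, hlt, (hadjc _).mpr (Or.inr hadj)⟩
          · rintro ⟨honb, hlt, hadj⟩
            have hne : pvIdx p ≠ (q.2 + m.2) * 8 + (q.1 + m.1) := by
              intro he
              exact hpt (pvIdx_inj p _ honb honbt (by rw [he]; rfl))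
            obtain ⟨hr1, hr2⟩ := pvIdx_range p honb
            refine ⟨honb, by rw [hget2 _ hr1 hr2, if_neg hne]; exact hlt, ?_⟩
            rcases (hadjc _).mp hadj with ⟨-, hic⟩ | hms
            · exact absurd (by rw [← hic, hidxt]) hne
            · exact hms
    · rw [show pvStepB q d (acc, arr) m = (acc, arr) from by
        simp only [pvStepB]; rw [if_neg hC]]
      obtain ⟨ih1, ih2, ih3⟩ := ih acc arr hlen
      have hnom : ∀ c : Int, pvDGetB arr c < 0 →
          ((pvAdjM q (m :: ms) c = true) ↔ (pvAdjM q ms c = true)) := by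
        intro c hlt
        rw [hadjc c]
        constructor
        · rintro (⟨honbt, hic⟩ | hms)
          · exfalso
            rw [pvOnB_iff, htgt1, htgt2] at honbt
            rw [← hic, hidxt] at hlt
            exact hC ⟨honbt.1, honbt.2.1, honbt.2.2.1, honbt.2.2.2, hlt⟩
          · exact hms
        · exact Or.inr
      refine ⟨ih1, ?_, ?_⟩
      · intro c hc1 hc2
        rw [ih2 c hc1 hc2]
        by_cases hcnd : pvDGetB arr c < 0 ∧ pvAdjM q ms c = true
        · rw [if_pos hcnd, if_pos ⟨hcnd.1, ((hnom c hcnd.1).mpr hcnd.2)⟩]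
        · rw [if_neg hcnd, if_neg (by
            rintro ⟨hlt, hadj⟩
            exact hcnd ⟨hlt, (hnom c hlt).mp hadj⟩)]
      · intro p
        rw [ih3 p]
        apply or_congr Iff.rfl
        constructor
        · rintro ⟨honb, hlt, hadj⟩
          exact ⟨honb, hlt, (hnom _ hlt).mpr hadj⟩
        · rintro ⟨honb, hlt, hadj⟩
          exact ⟨honb, hlt, (hnom _ hlt).mp hadj⟩

-- characterization of one whole push level
lemma pvPushOuter (d : Int) (hd : 0 ≤ d) :
    ∀ (cur : List (Int × Int)) (acc : List (Int × Int)) (arr : List Int),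
    arr.length = 64 →
    (cur.foldl (fun st q => pvMovesB.foldl (pvStepB q d) st) (acc, arr)).2.length = 64 ∧
    (∀ c : Int, 0 ≤ c → c < 64 →
      pvDGetB (cur.foldl (fun st q => pvMovesB.foldl (pvStepB q d) st) (acc, arr)).2 c
        = if pvDGetB arr c < 0 ∧ pvAdjC cur c then d + 1 else pvDGetB arr c) ∧
    (∀ p : Int × Int, p ∈ (cur.foldl (fun st q => pvMovesB.foldl (pvStepB q d) st) (acc, arr)).1 ↔
      p ∈ acc ∨ (pvOnB p = true ∧ pvDGetB arr (pvIdx p) < 0 ∧ pvAdjC cur (pvIdx p) = true)) := by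
  intro cur
  induction cur with
  | nil =>
    intro acc arr hlen
    simp only [List.foldl_nil]
    refine ⟨hlen, ?_, ?_⟩
    · intro c hc1 hc2
      rw [if_neg (by rintro ⟨-, hadj⟩; simp [pvAdjC] at hadj)]
    · intro p
      simp [pvAdjC]
  | cons q cur' ih =>
    intro acc arr hlen
    simp only [List.foldl_cons]
    have hadjc : ∀ c : Int, (pvAdjC (q :: cur') c = true) ↔
        (pvAdjM q pvMovesB c = true ∨ pvAdjC cur' c = true) := by
      intro c
      simp [pvAdjC, List.any_cons]
    obtain ⟨hin1, hin2, hin3⟩ := pvPushInner d hd q pvMovesB acc arr hlen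
    have hst : pvMovesB.foldl (pvStepB q d) (acc, arr)
        = ((pvMovesB.foldl (pvStepB q d) (acc, arr)).1,
           (pvMovesB.foldl (pvStepB q d) (acc, arr)).2) := rfl
    rw [hst]
    obtain ⟨ih1, ih2, ih3⟩ := ih (pvMovesB.foldl (pvStepB q d) (acc, arr)).1
      (pvMovesB.foldl (pvStepB q d) (acc, arr)).2 hin1
    refine ⟨ih1, ?_, ?_⟩
    · intro c hc1 hc2
      rw [ih2 c hc1 hc2, hin2 c hc1 hc2]
      by_cases h1 : pvDGetB arr c < 0 ∧ pvAdjM q pvMovesB c = true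
      · rw [if_pos h1]
        rw [if_neg (by rintro ⟨hlt, -⟩; omega)]
        rw [if_pos ⟨h1.1, (hadjc c).mpr (Or.inl h1.2)⟩]
      · rw [if_neg h1]
        by_cases h2 : pvDGetB arr c < 0 ∧ pvAdjC cur' c = true
        · rw [if_pos h2, if_pos ⟨h2.1, (hadjc c).mpr (Or.inr h2.2)⟩]
        · rw [if_neg h2, if_neg (by
            rintro ⟨hlt, hadj⟩
            rcases (hadjc c).mp hadj with hm | hc'
            · exact h1 ⟨hlt, hm⟩
            · exact h2 ⟨hlt, hc'⟩)]
    · intro p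
      rw [ih3 p, hin3 p]
      by_cases honb : pvOnB p = true
      · obtain ⟨hr1, hr2⟩ := pvIdx_range p honb
        rw [hin2 _ hr1 hr2]
        by_cases h1 : pvDGetB arr (pvIdx p) < 0 ∧ pvAdjM q pvMovesB (pvIdx p) = true
        · rw [if_pos h1]
          constructor
          · rintro ((hacc | ⟨-, -, -⟩) | ⟨-, hlt, -⟩)
            · exact Or.inl hacc
            · exact Or.inr ⟨honb, h1.1, (hadjc _).mpr (Or.inl h1.2)⟩
            · omega
          · rintro (hacc | ⟨-, -, -⟩)
            · exact Or.inl (Or.inl hacc)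
            · exact Or.inl (Or.inr ⟨honb, h1.1, h1.2⟩)
        · rw [if_neg h1]
          constructor
          · rintro ((hacc | ⟨-, hlt, hm⟩) | ⟨-, hlt, hc'⟩)
            · exact Or.inl hacc
            · exact absurd ⟨hlt, hm⟩ h1
            · exact Or.inr ⟨honb, hlt, (hadjc _).mpr (Or.inr hc')⟩
          · rintro (hacc | ⟨-, hlt, hadj⟩)
            · exact Or.inl (Or.inl hacc)
            · rcases (hadjc _).mp hadj with hm | hc'
              · exact absurd ⟨hlt, hm⟩ h1
              · exact Or.inr ⟨honb, hlt, hc'⟩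
      · constructor
        · rintro ((hacc | ⟨ho, -, -⟩) | ⟨ho, -, -⟩)
          · exact Or.inl hacc
          · exact absurd ho honb
          · exact absurd ho honb
        · rintro (hacc | ⟨ho, -, -⟩)
          · exact Or.inl (Or.inl hacc)
          · exact absurd ho honb

-- the level invariant tying the frontier to the board values
def pvInv (cur : List (Int × Int)) (dist : List Int) (d : Int) : Prop :=
  dist.length = 64 ∧ 0 ≤ d ∧
  (∀ p ∈ cur, pvOnB p = true) ∧
  (∀ p : Int × Int, pvOnB p = true → (pvDGetB dist (pvIdx p) = d ↔ p ∈ cur)) ∧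
  (∀ c : Int, 0 ≤ c → c < 64 → -1 ≤ pvDGetB dist c ∧ pvDGetB dist c ≤ d)

-- under the invariant, markability is exactly reachability from the current frontier
lemma pvMark_iff (cur : List (Int × Int)) (dist : List Int) (d : Int)
    (hinv : pvInv cur dist d) (c : Int) (h1 : 0 ≤ c) (h2 : c < 64) :
    pvMark dist d c = true ↔ (pvDGetB dist c < 0 ∧ pvAdjC cur c = true) := by
  obtain ⟨hlen, hd, hcur, hiff, hbnd⟩ := hinv
  unfold pvMark pvAdjC pvAdjM
  simp only [Bool.and_eq_true, decide_eq_true_eq, List.any_eq_true]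
  apply and_congr_right
  intro _
  constructor
  · rintro ⟨m, hm, honb, hval⟩
    refine ⟨pvTgt (pvCell c) m, (hiff _ honb).mp hval, (-m.1, -m.2), pvMovesNeg m hm, ?_⟩
    have htg : pvTgt (pvTgt (pvCell c) m) (-m.1, -m.2) = pvCell c := by
      unfold pvTgt; exact Prod.ext (by dsimp; ring) (by dsimp; ring)
    rw [htg]
    exact ⟨(pvCell_coords c h1 h2).1, by rw [(pvCell_coords c h1 h2).2]⟩
  · rintro ⟨q, hq, m, hm, honb, hidx⟩
    refine ⟨(-m.1, -m.2), pvMovesNeg m hm, ?_⟩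
    have hcc : pvCell c = pvTgt q m := by
      rw [← hidx]; exact pvCell_idx _ honb
    have htg : pvTgt (pvCell c) (-m.1, -m.2) = q := by
      rw [hcc]; unfold pvTgt; exact Prod.ext (by dsimp; ring) (by dsimp; ring)
    rw [htg]
    exact ⟨hcur q hq, (hiff q (hcur q hq)).mpr hq⟩

-- characterization of one pull sweep
lemma pvPullFold (d : Int) (hd : 0 ≤ d) (dist : List Int) :
    ∀ (l : List Int) (arr : List Int) (flag : Bool),
    arr.length = 64 → l.Nodup → (∀ i ∈ l, 0 ≤ i ∧ i < 64) →
    (∀ i ∈ l, pvDGetB arr i = pvDGetB dist i) →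
    (∀ c : Int, 0 ≤ c → c < 64 → (pvDGetB arr c = d ↔ pvDGetB dist c = d)) →
    (l.foldl (pvPStep d) (arr, flag)).1.length = 64 ∧
    (∀ c : Int, 0 ≤ c → c < 64 →
      pvDGetB (l.foldl (pvPStep d) (arr, flag)).1 c
        = if c ∈ l ∧ pvMark dist d c then d + 1 else pvDGetB arr c) ∧
    ((l.foldl (pvPStep d) (arr, flag)).2 = true ↔ flag = true ∨ ∃ i ∈ l, pvMark dist d i = true) := by
  intro l
  induction l with
  | nil =>
    intro arr flag hlen hnd hbnd hself hnbr
    simp only [List.foldl_nil]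
    refine ⟨hlen, ?_, by simp⟩
    intro c hc1 hc2
    rw [if_neg (by rintro ⟨hc, -⟩; simp at hc)]
  | cons i l' ih =>
    intro arr flag hlen hnd hbnd hself hnbr
    simp only [List.foldl_cons]
    obtain ⟨hi1, hi2⟩ := hbnd i List.mem_cons_self
    have hselfi : pvDGetB arr i = pvDGetB dist i := hself i List.mem_cons_self
    have hinl' : i ∉ l' := (List.nodup_cons.mp hnd).1
    have hndl' : l'.Nodup := (List.nodup_cons.mp hnd).2
    have hbndl' : ∀ j ∈ l', 0 ≤ j ∧ j < 64 := fun j hj => hbnd j (List.mem_cons_of_mem _ hj)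
    have htest : (pvMovesB.any (fun m => decide (0 ≤ PySem.Int.mod i 8 + m.1 ∧
          PySem.Int.mod i 8 + m.1 ≤ 7 ∧ 0 ≤ PySem.Int.floordiv i 8 + m.2 ∧
          PySem.Int.floordiv i 8 + m.2 ≤ 7 ∧
          pvDGetB arr ((PySem.Int.floordiv i 8 + m.2) * 8 + (PySem.Int.mod i 8 + m.1)) = d)) = true)
        ↔ (pvMovesB.any (fun m => pvOnB (pvTgt (pvCell i) m) &&
            decide (pvDGetB dist (pvIdx (pvTgt (pvCell i) m)) = d)) = true) := by
      rw [List.any_eq_true, List.any_eq_true]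
      apply exists_congr
      intro m
      apply and_congr Iff.rfl
      rw [Bool.and_eq_true, decide_eq_true_iff, decide_eq_true_iff]
      have honb : pvOnB (pvTgt (pvCell i) m) = true ↔
          (0 ≤ PySem.Int.mod i 8 + m.1 ∧ PySem.Int.mod i 8 + m.1 ≤ 7 ∧
           0 ≤ PySem.Int.floordiv i 8 + m.2 ∧ PySem.Int.floordiv i 8 + m.2 ≤ 7) := by
        rw [pvOnB_iff]
        exact Iff.rfl
      have hidx : pvIdx (pvTgt (pvCell i) m)
          = (PySem.Int.floordiv i 8 + m.2) * 8 + (PySem.Int.mod i 8 + m.1) := rfl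
      constructor
      · rintro ⟨hb1, hb2, hb3, hb4, hval⟩
        have honbt : pvOnB (pvTgt (pvCell i) m) = true := honb.mpr ⟨hb1, hb2, hb3, hb4⟩
        obtain ⟨hr1, hr2⟩ := pvIdx_range _ honbt
        rw [hidx] at hr1 hr2
        refine ⟨honbt, ?_⟩
        rw [hidx]
        rw [← (hnbr _ hr1 hr2)]
        exact hval
      · rintro ⟨honbt, hval⟩
        obtain ⟨hb1, hb2, hb3, hb4⟩ := honb.mp honbt
        obtain ⟨hr1, hr2⟩ := pvIdx_range _ honbt
        rw [hidx] at hr1 hr2 hval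
        exact ⟨hb1, hb2, hb3, hb4, (hnbr _ hr1 hr2).mpr hval⟩
    have hmarki : pvMark dist d i = true ↔
        (pvDGetB arr i < 0 ∧ (pvMovesB.any (fun m => decide (0 ≤ PySem.Int.mod i 8 + m.1 ∧
          PySem.Int.mod i 8 + m.1 ≤ 7 ∧ 0 ≤ PySem.Int.floordiv i 8 + m.2 ∧
          PySem.Int.floordiv i 8 + m.2 ≤ 7 ∧
          pvDGetB arr ((PySem.Int.floordiv i 8 + m.2) * 8 + (PySem.Int.mod i 8 + m.1)) = d)) = true)) := by
      unfold pvMark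
      rw [Bool.and_eq_true, decide_eq_true_iff, htest, hselfi]
    by_cases harr : pvDGetB arr i < 0
    · by_cases hany : (pvMovesB.any (fun m => decide (0 ≤ PySem.Int.mod i 8 + m.1 ∧
          PySem.Int.mod i 8 + m.1 ≤ 7 ∧ 0 ≤ PySem.Int.floordiv i 8 + m.2 ∧
          PySem.Int.floordiv i 8 + m.2 ≤ 7 ∧
          pvDGetB arr ((PySem.Int.floordiv i 8 + m.2) * 8 + (PySem.Int.mod i 8 + m.1)) = d)) = true)
      · have hstep : pvPStep d (arr, flag) i = (PySem.List.pySetD arr i (d + 1), true) := by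
          simp only [pvPStep]
          rw [if_pos harr, if_pos hany]
        rw [hstep]
        have hMi : pvMark dist d i = true := hmarki.mpr ⟨harr, hany⟩
        have hlen2 : (PySem.List.pySetD arr i (d + 1)).length = 64 := by
          rw [PySem.List.length_pySetD]; exact hlen
        have hget2 : ∀ c : Int, 0 ≤ c → c < 64 →
            pvDGetB (PySem.List.pySetD arr i (d + 1)) c
              = if c = i then d + 1 else pvDGetB arr c := by
          intro c hc1 hc2
          exact pvDSet_get arr i c (d + 1) hlen hi1 hi2 hc1 hc2
        have hself2 : ∀ j ∈ l', pvDGetB (PySem.List.pySetD arr i (d + 1)) j = pvDGetB dist j := by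
          intro j hj
          obtain ⟨hj1, hj2⟩ := hbndl' j hj
          rw [hget2 j hj1 hj2, if_neg (by rintro rfl; exact hinl' hj)]
          exact hself j (List.mem_cons_of_mem _ hj)
        have hnbr2 : ∀ c : Int, 0 ≤ c → c < 64 →
            (pvDGetB (PySem.List.pySetD arr i (d + 1)) c = d ↔ pvDGetB dist c = d) := by
          intro c hc1 hc2
          rw [hget2 c hc1 hc2]
          by_cases hci : c = i
          · subst hci
            rw [if_pos rfl]
            constructor
            · intro h; omega
            · intro h; rw [hselfi] at harr; omega
          · rw [if_neg hci]; exact hnbr c hc1 hc2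
        obtain ⟨ih1, ih2, ih3⟩ := ih _ true hlen2 hndl' hbndl' hself2 hnbr2
        refine ⟨ih1, ?_, ?_⟩
        · intro c hc1 hc2
          rw [ih2 c hc1 hc2]
          by_cases hci : c = i
          · subst hci
            rw [if_neg (by rintro ⟨hc, -⟩; exact hinl' hc)]
            rw [hget2 c hc1 hc2, if_pos rfl,
                if_pos ⟨List.mem_cons_self, hMi⟩]
          · rw [hget2 c hc1 hc2, if_neg hci]
            by_cases hcnd : c ∈ l' ∧ pvMark dist d c = true
            · rw [if_pos hcnd, if_pos ⟨List.mem_cons_of_mem _ hcnd.1, hcnd.2⟩]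
            · rw [if_neg hcnd, if_neg (by
                rintro ⟨hc, hm⟩
                rcases List.mem_cons.mp hc with rfl | hc'
                · exact hci rfl
                · exact hcnd ⟨hc', hm⟩)]
        · rw [ih3]
          constructor
          · intro _; exact Or.inr ⟨i, List.mem_cons_self, hMi⟩
          · intro _; exact Or.inl rfl
      · have hstep : pvPStep d (arr, flag) i = (arr, flag) := by
          simp only [pvPStep]
          rw [if_pos harr, if_neg hany]
        rw [hstep]
        have hMi : ¬ pvMark dist d i = true := fun h => hany (hmarki.mp h).2
        obtain ⟨ih1, ih2, ih3⟩ := ih arr flag hlen hndl' hbndl'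
          (fun j hj => hself j (List.mem_cons_of_mem _ hj)) hnbr
        refine ⟨ih1, ?_, ?_⟩
        · intro c hc1 hc2
          rw [ih2 c hc1 hc2]
          by_cases hcnd : c ∈ l' ∧ pvMark dist d c = true
          · rw [if_pos hcnd, if_pos ⟨List.mem_cons_of_mem _ hcnd.1, hcnd.2⟩]
          · rw [if_neg hcnd, if_neg (by
              rintro ⟨hc, hm⟩
              rcases List.mem_cons.mp hc with rfl | hc'
              · exact hMi hm
              · exact hcnd ⟨hc', hm⟩)]
        · rw [ih3]
          apply or_congr Iff.rfl
          constructor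
          · rintro ⟨j, hj, hm⟩
            exact ⟨j, List.mem_cons_of_mem _ hj, hm⟩
          · rintro ⟨j, hj, hm⟩
            rcases List.mem_cons.mp hj with rfl | hj'
            · exact absurd hm hMi
            · exact ⟨j, hj', hm⟩
    · have hstep : pvPStep d (arr, flag) i = (arr, flag) := by
        simp only [pvPStep]
        rw [if_neg harr]
      rw [hstep]
      have hMi : ¬ pvMark dist d i = true := fun h => harr (hmarki.mp h).1
      obtain ⟨ih1, ih2, ih3⟩ := ih arr flag hlen hndl' hbndl'
        (fun j hj => hself j (List.mem_cons_of_mem _ hj)) hnbr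
      refine ⟨ih1, ?_, ?_⟩
      · intro c hc1 hc2
        rw [ih2 c hc1 hc2]
        by_cases hcnd : c ∈ l' ∧ pvMark dist d c = true
        · rw [if_pos hcnd, if_pos ⟨List.mem_cons_of_mem _ hcnd.1, hcnd.2⟩]
        · rw [if_neg hcnd, if_neg (by
            rintro ⟨hc, hm⟩
            rcases List.mem_cons.mp hc with rfl | hc'
            · exact hMi hm
            · exact hcnd ⟨hc', hm⟩)]
      · rw [ih3]
        apply or_congr Iff.rfl
        constructor
        · rintro ⟨j, hj, hm⟩
          exact ⟨j, List.mem_cons_of_mem _ hj, hm⟩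
        · rintro ⟨j, hj, hm⟩
          rcases List.mem_cons.mp hj with rfl | hj'
          · exact absurd hm hMi
          · exact ⟨j, hj', hm⟩

lemma pvSweep_char (dist : List Int) (d : Int) (hd : 0 ≤ d) (hlen : dist.length = 64) :
    (pvPullSweep dist d).1 = pvSpec dist d ∧
    ((pvPullSweep dist d).2 = true ↔ ∃ i ∈ PySem.List.pyRange 0 64 1, pvMark dist d i = true) := by
  have hfold : pvPullSweep dist d
      = (PySem.List.pyRange 0 64 1).foldl (pvPStep d) (dist, false) := rfl
  obtain ⟨h1, h2, h3⟩ := pvPullFold d hd dist (PySem.List.pyRange 0 64 1) dist false hlen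
    (by decide) (by decide) (fun i _ => rfl) (fun c _ _ => Iff.rfl)
  constructor
  · rw [hfold]
    apply pvExt64 _ _ h1 (pvSpec_length dist d)
    intro c hc1 hc2
    rw [h2 c hc1 hc2, pvSpec_get dist d c hc1 hc2]
    have hcm : c ∈ PySem.List.pyRange 0 64 1 := PySem.List.mem_pyRange_one.mpr ⟨hc1, hc2⟩
    by_cases hm : pvMark dist d c = true
    · rw [if_pos ⟨hcm, hm⟩, if_pos hm]
    · rw [if_neg (by rintro ⟨-, h⟩; exact hm h), if_neg hm]
  · rw [hfold, h3]
    simp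

-- one unfolding of the pull loop
lemma pvPullLoop_succ (f : Nat) (dist : List Int) (d : Int) :
    pvPullLoop (f + 1) dist d =
      if (pvPullSweep dist d).2 = true then pvPullLoop f (pvPullSweep dist d).1 (d + 1)
      else (pvPullSweep dist d).1 := by
  rfl

-- counting negatives through List.range, for the fuel argument
def pvNegR (dist : List Int) : Nat :=
  (List.range 64).countP (fun (j : Nat) => decide (pvDGetB dist ((j : Nat) : Int) < 0))

lemma pvCountP_lt {α : Type} (l : List α) (p q : α → Bool)
    (h : ∀ x ∈ l, p x = true → q x = true)
    (x0 : α) (hx0 : x0 ∈ l) (h1 : q x0 = true) (h2 : ¬ p x0 = true) :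
    l.countP p < l.countP q := by
  induction l with
  | nil => cases hx0
  | cons a t ih =>
    simp only [List.countP_cons]
    have hif : ∀ b : Bool, (if b = true then 1 else 0) ≤ 1 := by intro b; cases b <;> simp
    rcases List.mem_cons.mp hx0 with rfl | hmem
    · have hle : t.countP p ≤ t.countP q :=
        List.countP_mono_left (fun x hx hpx => h x (List.mem_cons_of_mem _ hx) hpx)
      have e1 : (if p x0 = true then 1 else 0) = 0 := by simp [h2]
      have e2 : (if q x0 = true then 1 else 0) = 1 := by simp [h1]
      omega
    · have hlt := ih (fun x hx hpx => h x (List.mem_cons_of_mem _ hx) hpx) hmem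
      by_cases hpa : p a = true
      · have hqa := h a List.mem_cons_self hpa
        have e1 : (if p a = true then 1 else 0) = 1 := by simp [hpa]
        have e2 : (if q a = true then 1 else 0) = 1 := by simp [hqa]
        omega
      · have e1 : (if p a = true then 1 else 0) = 0 := by simp [hpa]
        have := hif (q a)
        omega

-- terminal case: when nothing is markable both loops stop with the same board
lemma pvAlignStop (cur : List (Int × Int)) (dist : List Int) (d : Int) (fF fP : Nat)
    (hinv : pvInv cur dist d)
    (hnomark : ¬ ∃ i ∈ PySem.List.pyRange 0 64 1, pvMark dist d i = true)
    (hfP : 0 < fP) :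
    pvFrBfs fF cur dist d = pvPullLoop fP dist d := by
  obtain ⟨hlen, hd, hmem, hiff, hbnd⟩ := hinv
  obtain ⟨hs1, hs2⟩ := pvSweep_char dist d hd hlen
  have hflag : ¬ (pvPullSweep dist d).2 = true := fun h => hnomark (hs2.mp h)
  have hspec : pvSpec dist d = dist := by
    apply pvExt64 _ _ (pvSpec_length dist d) hlen
    intro c hc1 hc2
    rw [pvSpec_get dist d c hc1 hc2,
        if_neg (fun hm => hnomark ⟨c, PySem.List.mem_pyRange_one.mpr ⟨hc1, hc2⟩, hm⟩)]
  have hpull : pvPullLoop fP dist d = dist := by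
    cases fP with
    | zero => omega
    | succ gP => rw [pvPullLoop_succ gP dist d, if_neg hflag, hs1, hspec]
  rw [hpull]
  cases cur with
  | nil => exact pvFrBfs_nil fF dist d
  | cons p cur' =>
    cases fF with
    | zero => rfl
    | succ gF =>
      rw [pvFrBfs_cons gF p cur' dist d]
      obtain ⟨hF1, hF2, hF3⟩ := pvPushOuter d hd (p :: cur') [] dist hlen
      have hnil : ((p :: cur').foldl (fun st q => pvMovesB.foldl (pvStepB q d) st)
          ([], dist)).1 = [] := by
        rw [List.eq_nil_iff_forall_not_mem]
        intro r hr
        rcases (hF3 r).mp hr with hacc | ⟨honb, hlt, hadj⟩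
        · simp at hacc
        · obtain ⟨hr1, hr2⟩ := pvIdx_range r honb
          exact hnomark ⟨pvIdx r, PySem.List.mem_pyRange_one.mpr ⟨hr1, hr2⟩,
            (pvMark_iff (p :: cur') dist d ⟨hlen, hd, hmem, hiff, hbnd⟩ _ hr1 hr2).mpr
              ⟨hlt, hadj⟩⟩
      rw [hnil, pvFrBfs_nil]
      apply pvExt64 _ _ hF1 hlen
      intro c hc1 hc2
      rw [hF2 c hc1 hc2,
          if_neg (fun hcnd => hnomark ⟨c, PySem.List.mem_pyRange_one.mpr ⟨hc1, hc2⟩,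
            (pvMark_iff (p :: cur') dist d ⟨hlen, hd, hmem, hiff, hbnd⟩ c hc1 hc2).mpr hcnd⟩)]

-- the main alignment: frontier BFS = pull loop, level by level
lemma pvAlign : ∀ (k : Nat) (cur : List (Int × Int)) (dist : List Int) (d : Int) (fF fP : Nat),
    pvInv cur dist d → pvNegR dist ≤ k → k < fF → k < fP →
    pvFrBfs fF cur dist d = pvPullLoop fP dist d := by
  intro k
  induction k with
  | zero =>
    intro cur dist d fF fP hinv hk hfF hfP
    obtain ⟨hlen, hd, hmem, hiff, hbnd⟩ := hinv
    have hnomark : ¬ ∃ i ∈ PySem.List.pyRange 0 64 1, pvMark dist d i = true := by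
      rintro ⟨i, hiR, hiM⟩
      obtain ⟨hi1, hi2⟩ := PySem.List.mem_pyRange_one.mp hiR
      have hlt : pvDGetB dist i < 0 := by
        unfold pvMark at hiM
        rw [Bool.and_eq_true, decide_eq_true_iff] at hiM
        exact hiM.1
      have hz : (List.range 64).countP
          (fun (j : Nat) => decide (pvDGetB dist ((j : Nat) : Int) < 0)) = 0 := by
        unfold pvNegR at hk
        omega
      rw [List.countP_eq_zero] at hz
      have := hz i.toNat (List.mem_range.mpr (by omega))
      rw [decide_eq_true_iff] at this
      exact this (by rw [show ((i.toNat : Nat) : Int) = i from by omega]; exact hlt)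
    exact pvAlignStop cur dist d fF fP ⟨hlen, hd, hmem, hiff, hbnd⟩ hnomark (by omega)
  | succ n ihk =>
    intro cur dist d fF fP hinv hk hfF hfP
    obtain ⟨hlen, hd, hmem, hiff, hbnd⟩ := hinv
    by_cases hne : ∃ i ∈ PySem.List.pyRange 0 64 1, pvMark dist d i = true
    · cases cur with
      | nil =>
        exfalso
        obtain ⟨i, hiR, hiM⟩ := hne
        obtain ⟨hi1, hi2⟩ := PySem.List.mem_pyRange_one.mp hiR
        rw [pvMark_iff [] dist d ⟨hlen, hd, hmem, hiff, hbnd⟩ i hi1 hi2] at hiM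
        simp [pvAdjC] at hiM
      | cons p cur' =>
        cases fF with
        | zero => omega
        | succ gF =>
          cases fP with
          | zero => omega
          | succ gP =>
            rw [pvFrBfs_cons gF p cur' dist d, pvPullLoop_succ gP dist d]
            obtain ⟨hs1, hs2⟩ := pvSweep_char dist d hd hlen
            rw [if_pos (hs2.mpr hne), hs1]
            obtain ⟨hF1, hF2, hF3⟩ := pvPushOuter d hd (p :: cur') [] dist hlen
            have harr : ((p :: cur').foldl (fun st q => pvMovesB.foldl (pvStepB q d) st)
                ([], dist)).2 = pvSpec dist d := by
              apply pvExt64 _ _ hF1 (pvSpec_length dist d)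
              intro c hc1 hc2
              rw [hF2 c hc1 hc2, pvSpec_get dist d c hc1 hc2]
              have hiffm := pvMark_iff (p :: cur') dist d ⟨hlen, hd, hmem, hiff, hbnd⟩ c hc1 hc2
              by_cases hm : pvMark dist d c = true
              · rw [if_pos (hiffm.mp hm), if_pos hm]
              · rw [if_neg (fun hcnd => hm (hiffm.mpr hcnd)), if_neg hm]
            rw [harr]
            have hinv2 : pvInv ((p :: cur').foldl (fun st q => pvMovesB.foldl (pvStepB q d) st)
                ([], dist)).1 (pvSpec dist d) (d + 1) := by
              refine ⟨pvSpec_length dist d, by omega, ?_, ?_, ?_⟩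
              · intro r hr
                exact ((hF3 r).mp hr).resolve_left (by simp) |>.1
              · intro r honb
                obtain ⟨hr1, hr2⟩ := pvIdx_range r honb
                rw [pvSpec_get dist d _ hr1 hr2]
                constructor
                · intro hv
                  by_cases hm : pvMark dist d (pvIdx r) = true
                  · rw [pvMark_iff (p :: cur') dist d ⟨hlen, hd, hmem, hiff, hbnd⟩ _ hr1 hr2] at hm
                    exact (hF3 r).mpr (Or.inr ⟨honb, hm.1, hm.2⟩)
                  · rw [if_neg hm] at hv
                    have := (hbnd _ hr1 hr2).2
                    omega
                · intro hr
                  rcases (hF3 r).mp hr with hacc | ⟨-, hlt, hadj⟩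
                  · simp at hacc
                  · rw [if_pos (by
                      rw [pvMark_iff (p :: cur') dist d ⟨hlen, hd, hmem, hiff, hbnd⟩ _ hr1 hr2]
                      exact ⟨hlt, hadj⟩)]
              · intro c hc1 hc2
                rw [pvSpec_get dist d c hc1 hc2]
                by_cases hm : pvMark dist d c = true
                · rw [if_pos hm]; omega
                · rw [if_neg hm]
                  have := hbnd c hc1 hc2
                  omega
            have hdec : pvNegR (pvSpec dist d) < pvNegR dist := by
              unfold pvNegR
              obtain ⟨i, hiR, hiM⟩ := hne
              obtain ⟨hi1, hi2⟩ := PySem.List.mem_pyRange_one.mp hiR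
              apply pvCountP_lt (List.range 64) _ _ ?_ i.toNat
                (List.mem_range.mpr (by omega)) ?_ ?_
              · intro j hj hpj
                rw [decide_eq_true_iff] at hpj ⊢
                have hj64 : (j : Int) < 64 := by
                  have := List.mem_range.mp hj; omega
                rw [pvSpec_get dist d _ (by omega) hj64] at hpj
                by_cases hm : pvMark dist d ((j : Nat) : Int) = true
                · rw [if_pos hm] at hpj; omega
                · rw [if_neg hm] at hpj; exact hpj
              · rw [decide_eq_true_iff, show ((i.toNat : Nat) : Int) = i from by omega]
                unfold pvMark at hiM
                rw [Bool.and_eq_true, decide_eq_true_iff] at hiM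
                exact hiM.1
              · rw [decide_eq_true_iff, show ((i.toNat : Nat) : Int) = i from by omega,
                    pvSpec_get dist d i hi1 hi2, if_pos hiM]
                omega
            exact ihk _ (pvSpec dist d) (d + 1) gF gP hinv2 (by omega) (by omega) (by omega)
    · exact pvAlignStop cur dist d fF fP ⟨hlen, hd, hmem, hiff, hbnd⟩ hne (by omega)

-- the initial board and frontier satisfy the invariant (rows 0-7 only)
lemma pvInvInit (col row : Int) (hc1 : 0 ≤ col) (hc2 : col < 8)
    (hr1 : 0 ≤ row) (hr2 : row < 8) :
    pvInv [(col, row)] (PySem.List.pySetD (List.replicate 64 (-1 : Int)) (row * 8 + col) 0) 0 := by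
  have hlen : (List.replicate 64 (-1 : Int)).length = 64 := by simp
  have hread : ∀ c : Int, 0 ≤ c → c < 64 →
      pvDGetB (PySem.List.pySetD (List.replicate 64 (-1 : Int)) (row * 8 + col) 0) c
        = if c = row * 8 + col then 0 else -1 := by
    intro c hc1 hc2
    rw [pvDSet_get _ _ _ _ hlen (by omega) (by omega) hc1 hc2]
    by_cases h : c = row * 8 + col
    · rw [if_pos h, if_pos h]
    · rw [if_neg h, if_neg h]
      exact pvGetRepl 64 (-1) (-1) c (by push_cast; omega) (by push_cast; omega)
  have honb : pvOnB (col, row) = true := by rw [pvOnB_iff]; exact ⟨hc1, by omega, hr1, by omega⟩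
  refine ⟨by rw [PySem.List.length_pySetD]; exact hlen, le_refl 0, ?_, ?_, ?_⟩
  · intro p hp
    rw [List.mem_singleton.mp hp]
    exact honb
  · intro p hp
    obtain ⟨hpi1, hpi2⟩ := pvIdx_range p hp
    rw [hread (pvIdx p) hpi1 hpi2]
    constructor
    · intro hv
      by_cases h : pvIdx p = row * 8 + col
      · have : p = (col, row) := pvIdx_inj p (col, row) hp honb (by rw [h]; rfl)
        rw [this]; exact List.mem_singleton_self _
      · rw [if_neg h] at hv; omega
    · intro hmem
      rw [List.mem_singleton.mp hmem]
      rw [if_pos (show pvIdx ((col, row) : Int × Int) = row * 8 + col from rfl)]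
  · intro c hc1 hc2
    rw [hread c hc1 hc2]
    by_cases h : c = row * 8 + col
    · rw [if_pos h]; omega
    · rw [if_neg h]; omega

lemma pvRunFr_eq (col row : Int) (hc1 : 0 ≤ col) (hc2 : col < 8)
    (hr1 : 0 ≤ row) (hr2 : row < 8) :
    pvFrRun col row = pvRunP col row := by
  unfold pvFrRun pvRunP
  have hinv := pvInvInit col row hc1 hc2 hr1 hr2
  have hneg : pvNegR (PySem.List.pySetD (List.replicate 64 (-1 : Int)) (row * 8 + col) 0) ≤ 64 := by
    unfold pvNegR
    calc List.countP _ (List.range 64) ≤ (List.range 64).length := List.countP_le_length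
    _ = 64 := by simp
  exact congrArg pvScanB (pvAlign 64 [(col, row)] _ 0 100 100 hinv hneg (by omega) (by omega))

lemma pvGoFr_eq (c0 c1 : Char) (h0 : c0 ∈ pvColsB)
    (h1 : c1 ∈ (['1','2','3','4','5','6','7','8'] : List Char)) :
    pvFrGo c0 c1 = pvGoP c0 c1 := by
  unfold pvFrGo pvGoP
  cases hidx : PySem.List.index? pvColsB c0 with
  | none => exact absurd ((PySem.List.index?_eq_none_iff _ _).mp hidx) (by simpa using h0)
  | some kcol =>
    obtain ⟨hk, -, -⟩ := PySem.List.getElem_of_index?_eq_some hidx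
    have hk8 : kcol < 8 := by simpa using hk
    fin_cases h1 <;>
      simp only [show PySem.Int.ofChars? ['1'] = some 1 from by decide,
        show PySem.Int.ofChars? ['2'] = some 2 from by decide,
        show PySem.Int.ofChars? ['3'] = some 3 from by decide,
        show PySem.Int.ofChars? ['4'] = some 4 from by decide,
        show PySem.Int.ofChars? ['5'] = some 5 from by decide,
        show PySem.Int.ofChars? ['6'] = some 6 from by decide,
        show PySem.Int.ofChars? ['7'] = some 7 from by decide,
        show PySem.Int.ofChars? ['8'] = some 8 from by decide] <;>
      exact pvRunFr_eq _ _ (by omega) (by omega) (by omega) (by omega)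

-- ===== VERDICT (by name: the statements are the Claim_ definitions above) =====
theorem get_hiding_places_spec : Claim_unchanged_get_hiding_places := by
  intro s _ hpre
  unfold Pre_get_hiding_places at hpre
  unfold Spec_get_hiding_places
  intro hnd
  cases hl : s.toList with
  | nil => simp [hl] at hpre
  | cons c0 t =>
    cases t with
    | nil => simp [hl] at hpre
    | cons c1 rest =>
      rw [hl] at hpre
      simp only [Bool.and_eq_true, List.contains_eq_mem, decide_eq_true_eq] at hpre
      have hne0 : c1 ≠ '0' := by
        intro hc
        exact hnd (by unfold D_get_hiding_places; rw [hl, hc]; rfl)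
      have h18 : c1 ∈ (['1','2','3','4','5','6','7','8'] : List Char) := by
        have := hpre.2
        fin_cases this <;> simp_all
      obtain ⟨hA, hB⟩ := pvPort_eq c0 c1 rest s hl
      rw [hA, hB, pvGo_eq c0 c1 hpre.1 (by fin_cases h18 <;> decide),
          pvGoFr_eq c0 c1 (by rw [show pvColsB = pvColsA from by decide]; exact hpre.1) h18]

theorem get_hiding_places_changed : Claim_changed_get_hiding_places := by
  unfold Claim_changed_get_hiding_places
  refine ⟨by decide, by decide, by decide, ?_, ?_, by decide⟩
  · have h := (pvPort_eq 'a' '0' [] pvDiffWitness_get_hiding_places (by decide)).1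
    rw [h, pvGo_eq 'a' '0' (by decide) (by decide)]
    decide
  · have h := (pvPort_eq 'a' '0' [] pvDiffWitness_get_hiding_places (by decide)).2
    rw [h]
    decide

set_option maxHeartbeats 4000000 in
theorem get_hiding_places_tight : Claim_exact_get_hiding_places := by
  intro s _ hpre hd
  unfold Pre_get_hiding_places at hpre
  unfold D_get_hiding_places at hd
  cases hl : s.toList with
  | nil => simp [hl] at hpre
  | cons c0 t =>
    cases t with
    | nil => simp [hl] at hpre
    | cons c1 rest =>
      rw [hl] at hpre hd
      simp only [Bool.and_eq_true, List.contains_eq_mem, decide_eq_true_eq] at hpre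
      simp only [List.getElem?_cons_succ, List.getElem?_cons_zero, Option.some_inj] at hd
      subst hd
      obtain ⟨hA, hB⟩ := pvPort_eq c0 '0' rest s hl
      rw [hA, hB, pvGo_eq c0 '0' hpre.1 (by decide)]
      have h0 : c0 ∈ (['a','b','c','d','e','f','g','h'] : List Char) := by
        rw [show (['a','b','c','d','e','f','g','h'] : List Char) = pvColsA from by decide]
        exact hpre.1
      fin_cases h0 <;> decide
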